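-- pv_equiv track=rewrite | github.com/chchaeun/study-algorithm | 기출/카카오/길이가-같은-두개의큐.py | solution
-- ===== SOURCE A (Python) =====
-- from collections import defaultdict, deque
--
-- def solution(queue1, queue2):
--     head, tail = 0, len(queue1)-1
--     queue = queue1 + queue2
--     _sum = sum(queue)
--     if _sum%2!=0: return -1
--     goal = _sum//2
--
--     n = len(queue)
--     current = sum(queue1)
--
--     dq = deque([(head, tail, current, 0)])
--     dx, dy = [1, 0], [0, 1]
--     visited = defaultdict(int)
--     while dq:
--         chead, ctail, current, count = dq.popleft()
--         for i in range(2):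
--             nhead, ntail = (chead+dx[i])%n, (ctail+dy[i])%n
--             if i==0:
--                 ncurrent = current - queue[chead]
--             else:
--                 ncurrent = current + queue[ntail]
--             if ncurrent==goal:
--                 return count + 1
--             if not visited[(nhead, ntail)]:
--                 dq.append((nhead, ntail, ncurrent, count+1))
--                 visited[(nhead, ntail)] = 1
--     return -1
-- ===== SOURCE B (Python) =====
-- def solution(queue1, queue2):
--     queue = queue1 + queue2
--     total = sum(queue)
--     if total % 2 != 0:
--         return -1
--     goal = total // 2
--     n = len(queue)
--     n1 = len(queue1)
--     s1 = sum(queue1)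
--     # prefix sums: pops[a] = sum of the first a elements removed at the head,
--     # pushes[b] = sum of the first b elements appended at the tail
--     pops = [0]
--     for i in range(n):
--         pops.append(pops[-1] + queue[i])
--     pushes = [0]
--     for i in range(n):
--         pushes.append(pushes[-1] + queue[(n1 + i) % n])
--     # scan reachable states by total move count k = a + b, smallest first
--     for k in range(1, 2 * n + 1):
--         for a in range(max(0, k - n), min(k, n) + 1):
--             if s1 - pops[a] + pushes[k - a] == goal:
--                 return k
--     return -1
-- ===== Notes on version B (the rewrite author's own statement) =====
-- stated objective: alternative
-- what changed: Replaces the deque-and-visited-dict BFS over (head,tail) index states by a direct smallest-move-count-first scan of the reachable (pops,pushes) states using two prefix-sum arrays; Pre_ excludes only ([],[]), where A raises ZeroDivisionError.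
-- intended difference: On inputs where no state reachable in at most n+1 moves balances the sums but A's index-wraparound probe of the impossible state 'n+1 head-pops from n elements' happens to hit the target sum, A returns the impossible move count n+1 while B returns the true minimum over reachable states (or -1), which is the intended value. — e.g. on solution([], [3, -5]): A returns 3, B returns -1
-- outside the precondition, e.g. on solution([], []): A raises ZeroDivisionError, B returns -1
import Mathlib
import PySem

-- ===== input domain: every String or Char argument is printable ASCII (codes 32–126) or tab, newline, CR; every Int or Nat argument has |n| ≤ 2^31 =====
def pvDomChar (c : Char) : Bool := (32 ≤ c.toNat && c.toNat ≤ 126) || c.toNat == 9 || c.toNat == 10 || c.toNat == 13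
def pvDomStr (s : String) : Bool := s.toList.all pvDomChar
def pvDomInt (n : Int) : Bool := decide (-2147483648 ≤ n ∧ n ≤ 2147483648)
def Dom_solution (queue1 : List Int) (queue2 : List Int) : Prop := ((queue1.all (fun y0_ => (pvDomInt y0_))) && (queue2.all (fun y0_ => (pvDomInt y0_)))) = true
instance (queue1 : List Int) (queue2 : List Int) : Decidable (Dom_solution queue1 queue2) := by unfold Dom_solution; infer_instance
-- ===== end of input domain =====

-- B replaces A's deque-and-visited-dict BFS by a direct smallest-move-count-first scan
-- of the reachable (head-pops, tail-pushes) states using prefix sums; where A's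
-- index-wraparound probe of the impossible state "n+1 head-pops" changes A's answer,
-- B intentionally differs (see D_solution below).

-- ===== PORT A =====
-- the `while dq` loop of A; `fuel` only makes the recursion structural (it is proved
-- sufficient below: the loop always terminates by exhausting the queue)
def bfsA (q : List Int) (nI g : Int) : ℕ → List (Int × Int × Int × Int) → PySem.Dict (Int × Int) Int → Int
  | 0, _, _ => -1
  | _ + 1, [], _ => -1
  | fuel + 1, (chead, ctail, current, count) :: rest, visited =>
    -- i = 0 (dx,dy = 1,0): advance the head pointer
    let nhead0 := PySem.Int.mod (chead + 1) nI
    let ntail0 := PySem.Int.mod (ctail + 0) nI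
    let ncur0 := current - PySem.List.pyGetD q chead 0   -- queue[chead]; chead is always in range
    if ncur0 = g then count + 1
    else
      let s1 := if visited.getD (nhead0, ntail0) 0 = 0 then
          (rest ++ [(nhead0, ntail0, ncur0, count + 1)], visited.insert (nhead0, ntail0) 1)
        else (rest, visited)
      -- i = 1 (dx,dy = 0,1): advance the tail pointer
      let nhead1 := PySem.Int.mod (chead + 0) nI
      let ntail1 := PySem.Int.mod (ctail + 1) nI
      let ncur1 := current + PySem.List.pyGetD q ntail1 0   -- queue[ntail]; ntail is always in range
      if ncur1 = g then count + 1
      else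
        let s2 := if s1.2.getD (nhead1, ntail1) 0 = 0 then
            (s1.1 ++ [(nhead1, ntail1, ncur1, count + 1)], s1.2.insert (nhead1, ntail1) 1)
          else s1
        bfsA q nI g fuel s2.1 s2.2

def solution (queue1 : List Int) (queue2 : List Int) : Int :=
  let tail : Int := (queue1.length : Int) - 1
  let queue := queue1 ++ queue2
  let s := queue.sum
  if PySem.Int.mod s 2 ≠ 0 then -1
  else
    bfsA queue (queue.length : Int) (PySem.Int.floordiv s 2)
      ((2 * queue.length + 2) * (queue.length + 2))
      [(0, tail, queue1.sum, 0)] PySem.Dict.empty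

-- ===== PORT B =====
def bHits (pops pushes : List Int) (s1 goal : Int) (a b : Int) : Bool :=
  decide (s1 - PySem.List.pyGetD pops a 0 + PySem.List.pyGetD pushes b 0 = goal)

-- the `for k in range(1, 2*n+1)` loop of B, with its early return
def bLoop (pops pushes : List Int) (s1 goal nI : Int) : List Int → Int
  | [] => -1
  | k :: rest =>
    if (PySem.List.pyRange (max 0 (k - nI)) (min k nI + 1) 1).any
        (fun a => bHits pops pushes s1 goal a (k - a)) then k
    else bLoop pops pushes s1 goal nI rest

def solution_alt (queue1 : List Int) (queue2 : List Int) : Int :=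
  let queue := queue1 ++ queue2
  let total := queue.sum
  if PySem.Int.mod total 2 ≠ 0 then -1
  else
    let goal := PySem.Int.floordiv total 2
    let nI : Int := (queue.length : Int)
    let n1I : Int := (queue1.length : Int)
    let pops := (PySem.List.pyRange 0 nI 1).foldl
      (fun (st : List Int × Int) i =>
        (st.1 ++ [st.2 + PySem.List.pyGetD queue i 0],
         st.2 + PySem.List.pyGetD queue i 0)) ([0], 0)
    let pushes := (PySem.List.pyRange 0 nI 1).foldl
      (fun (st : List Int × Int) i =>
        (st.1 ++ [st.2 + PySem.List.pyGetD queue (PySem.Int.mod (n1I + i) nI) 0],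
         st.2 + PySem.List.pyGetD queue (PySem.Int.mod (n1I + i) nI) 0)) ([0], 0)
    bLoop pops.1 pushes.1 queue1.sum goal nI (PySem.List.pyRange 1 (2 * nI + 1) 1)

-- ===== PRECONDITION & SPEC =====
-- Pre_ excludes only the input pair ([], []), on which A raises ZeroDivisionError.
def Pre_solution (queue1 : List Int) (queue2 : List Int) : Prop := queue1 ++ queue2 ≠ []
instance (queue1 : List Int) (queue2 : List Int) : Decidable (Pre_solution queue1 queue2) := by
  unfold Pre_solution; infer_instance

def pvWitness_solution : List Int × List Int := ([1], [1])

-- On inputs where no state reachable in at most n+1 moves balances the sums but A's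
-- out-of-range wraparound probe (popping all n elements and then one more) happens to
-- hit the target, A returns the impossible move count n+1; B returns the true minimum
-- over the reachable states (or -1), which is the intended value.
def D_solution (queue1 : List Int) (queue2 : List Int) : Prop :=
  PySem.Int.mod (queue1 ++ queue2).sum 2 = 0 ∧
  2 * (queue1.sum - (queue1 ++ queue2).getD 0 0) = 3 * (queue1 ++ queue2).sum ∧
  ∀ a ∈ List.range ((queue1 ++ queue2).length + 1), ∀ b ∈ List.range ((queue1 ++ queue2).length + 1),
    1 ≤ a + b → a + b ≤ (queue1 ++ queue2).length + 1 →
    2 * (queue1.sum - ((queue1 ++ queue2).take a).sum + ((queue2 ++ queue1).take b).sum) ≠ (queue1 ++ queue2).sum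
instance (queue1 : List Int) (queue2 : List Int) : Decidable (D_solution queue1 queue2) := by
  unfold D_solution; infer_instance

def Spec_solution (queue1 : List Int) (queue2 : List Int) (out : Int) : Prop :=
  ¬ D_solution queue1 queue2 → out = solution_alt queue1 queue2
instance (queue1 : List Int) (queue2 : List Int) (out : Int) : Decidable (Spec_solution queue1 queue2 out) := by
  unfold Spec_solution; infer_instance

def pvDiffWitness_solution : List Int × List Int := ([], [3, -5])
def pvDiffWitnessOut_solution : Int × Int := (3, -1)

-- ===== CLAIM =====
def Claim_unchanged_solution : Prop := ∀ (queue1 : List Int) (queue2 : List Int), Dom_solution queue1 queue2 → Pre_solution queue1 queue2 → Spec_solution queue1 queue2 (solution queue1 queue2)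
def Claim_changed_solution : Prop := Dom_solution (pvDiffWitness_solution.1) (pvDiffWitness_solution.2) ∧ Pre_solution (pvDiffWitness_solution.1) (pvDiffWitness_solution.2) ∧ D_solution (pvDiffWitness_solution.1) (pvDiffWitness_solution.2) ∧ solution (pvDiffWitness_solution.1) (pvDiffWitness_solution.2) = pvDiffWitnessOut_solution.1 ∧ solution_alt (pvDiffWitness_solution.1) (pvDiffWitness_solution.2) = pvDiffWitnessOut_solution.2 ∧ pvDiffWitnessOut_solution.1 ≠ pvDiffWitnessOut_solution.2
def Claim_exact_solution : Prop := ∀ (queue1 : List Int) (queue2 : List Int), Dom_solution queue1 queue2 → Pre_solution queue1 queue2 → D_solution queue1 queue2 → solution queue1 queue2 ≠ solution_alt queue1 queue2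

-- ===== LEMMAS AND PROOFS =====

-- Abstract model.  Throughout, n := q.length ≥ 1, n1 := queue1.length,
-- a = number of head moves, b = number of tail moves of a BFS state.

-- cyclic prefix sums: pvP q a = sum of the first a elements popped at the head,
-- pvQ q s b = sum of the first b elements read cyclically from index s
def pvP (q : List Int) : ℕ → Int
  | 0 => 0
  | a + 1 => pvP q a + q.getD (a % q.length) 0

def pvQ (q : List Int) (s : ℕ) : ℕ → Int
  | 0 => 0
  | b + 1 => pvQ q s b + q.getD ((s + b) % q.length) 0

-- queue1's sum after a head moves and b tail moves
def pvF (q : List Int) (n1 : ℕ) (S1 : Int) (a b : ℕ) : Int := S1 - pvP q a + pvQ q n1 b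

-- the (nhead, ntail) residue pair A stores for state (a, b)
def pvRes (n n1 : ℕ) (c : ℕ × ℕ) : ℕ × ℕ := (c.1 % n, (n1 + n - 1 + c.2) % n)

-- the set of states A's BFS ever enqueues (proved below): [0,n)² plus the wrap state (n,0)
def pvEnqB (n : ℕ) (c : ℕ × ℕ) : Bool := (decide (c.1 < n) && decide (c.2 < n)) || decide (c = (n, 0))

-- abstract mirror of one visited-checked enqueue
def pvGen1 (n n1 : ℕ) (st : List (ℕ × ℕ) × List (ℕ × ℕ)) (c : ℕ × ℕ) : List (ℕ × ℕ) × List (ℕ × ℕ) :=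
  if pvRes n n1 c ∈ st.2 then st else (st.1 ++ [c], st.2 ++ [pvRes n n1 c])

-- abstract mirror of processing one parent (both successors, in A's order)
def pvGenP (n n1 : ℕ) (st : List (ℕ × ℕ) × List (ℕ × ℕ)) (p : ℕ × ℕ) : List (ℕ × ℕ) × List (ℕ × ℕ) :=
  pvGen1 n n1 (pvGen1 n n1 st (p.1 + 1, p.2)) (p.1, p.2 + 1)

def pvGenL (n n1 : ℕ) (st : List (ℕ × ℕ) × List (ℕ × ℕ)) (R : List (ℕ × ℕ)) : List (ℕ × ℕ) × List (ℕ × ℕ) :=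
  R.foldl (pvGenP n n1) st

-- the visited dict holding exactly the residues in `marked`
def pvDictOf (marked : List (ℕ × ℕ)) : PySem.Dict (Int × Int) Int :=
  marked.foldl (fun d r => d.insert ((r.1 : Int), (r.2 : Int)) 1) PySem.Dict.empty

-- the queue entry A stores for state (a, b)
def pvEnc (q : List Int) (n1 : ℕ) (S1 : Int) (c : ℕ × ℕ) : Int × Int × Int × Int :=
  (((c.1 % q.length : ℕ) : Int), (((n1 + q.length - 1 + c.2) % q.length : ℕ) : Int),
   pvF q n1 S1 c.1 c.2, ((c.1 + c.2 : ℕ) : Int))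

-- "some successor of parent p meets the goal"
def pvHitB (q : List Int) (n1 : ℕ) (S1 g : Int) (p : ℕ × ℕ) : Bool :=
  decide (pvF q n1 S1 (p.1 + 1) p.2 = g) || decide (pvF q n1 S1 p.1 (p.2 + 1) = g)

-- "some successor tested while processing level j meets the goal", parent form
def pvRowPar (q : List Int) (n1 : ℕ) (S1 g : Int) (j : ℕ) : Bool :=
  (List.range (q.length + 1)).any
    (fun x => decide (x ≤ j) && pvEnqB q.length (x, j - x) && pvHitB q n1 S1 g (x, j - x))

def pvFirstPar (q : List Int) (n1 : ℕ) (S1 g : Int) : ℕ → ℕ → Int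
  | 0, _ => -1
  | s + 1, j => if pvRowPar q n1 S1 g j then ((j : Int) + 1) else pvFirstPar q n1 S1 g s (j + 1)

-- the same row condition, candidate form: rectangle minus (n,n) (n>1) plus the wrap probe
def pvRowC (q : List Int) (n1 : ℕ) (S1 g : Int) (j : ℕ) : Bool :=
  ((List.range (q.length + 2)).any fun x =>
     decide (j + 1 ≤ x + q.length) && decide (x ≤ j + 1) && decide (x ≤ q.length) &&
     (!(decide (x = q.length) && decide (j + 1 - x = q.length) && decide (1 < q.length))) &&
     decide (pvF q n1 S1 x (j + 1 - x) = g))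
  || (decide (j + 1 = q.length + 1) && decide (pvF q n1 S1 (q.length + 1) 0 = g))

def pvFirstC (q : List Int) (n1 : ℕ) (S1 g : Int) : ℕ → ℕ → Int
  | 0, _ => -1
  | s + 1, j => if pvRowC q n1 S1 g j then ((j : Int) + 1) else pvFirstC q n1 S1 g s (j + 1)

-- B's row: the plain rectangle of reachable states
def pvRowRect (q : List Int) (n1 : ℕ) (S1 g : Int) (j : ℕ) : Bool :=
  (List.range (q.length + 2)).any fun x =>
    decide (j + 1 ≤ x + q.length) && decide (x ≤ j + 1) && decide (x ≤ q.length) &&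
    decide (pvF q n1 S1 x (j + 1 - x) = g)

def pvFirstRect (q : List Int) (n1 : ℕ) (S1 g : Int) : ℕ → ℕ → Int
  | 0, _ => -1
  | s + 1, j => if pvRowRect q n1 S1 g j then ((j : Int) + 1) else pvFirstRect q n1 S1 g s (j + 1)

-- level invariant: L is exactly the enqueued states of level k (sorted by descending
-- first move-count), M exactly the residues marked so far
def pvInv (n n1 : ℕ) (k : ℕ) (L M : List (ℕ × ℕ)) : Prop :=
  (∀ c, c ∈ L ↔ (pvEnqB n c = true ∧ c.1 + c.2 = k)) ∧
  L.Pairwise (fun p r => r.1 < p.1) ∧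
  (∀ r, r ∈ M ↔ ∃ c, pvEnqB n c = true ∧ 1 ≤ c.1 + c.2 ∧ c.1 + c.2 ≤ k ∧ pvRes n n1 c = r)

theorem pvDict_aux (marked : List (ℕ × ℕ)) : ∀ (d : PySem.Dict (Int × Int) Int) (u : ℕ × ℕ),
    (marked.foldl (fun d r => d.insert ((r.1 : Int), (r.2 : Int)) 1) d).getD ((u.1 : Int), (u.2 : Int)) 0 =
      if u ∈ marked then 1 else d.getD ((u.1 : Int), (u.2 : Int)) 0 := by
  induction marked with
  | nil => intro d u; simp
  | cons r rest ih =>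
    intro d u
    simp only [List.foldl_cons, ih, List.mem_cons]
    by_cases hm : u ∈ rest
    · simp [hm]
    · by_cases he : u = r
      · subst he
        simp [hm, PySem.Dict.getD_insert]
      · have hne : ((u.1 : Int), (u.2 : Int)) ≠ ((r.1 : Int), (r.2 : Int)) := by
          intro hc
          apply he
          have h1 : (u.1 : Int) = r.1 := congrArg Prod.fst hc
          have h2 : (u.2 : Int) = r.2 := congrArg Prod.snd hc
          exact Prod.ext (by exact_mod_cast h1) (by exact_mod_cast h2)
        simp [hm, he, PySem.Dict.getD_insert, hne]

theorem pvDictOf_getD (marked : List (ℕ × ℕ)) (u : ℕ × ℕ) :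
    (pvDictOf marked).getD ((u.1 : Int), (u.2 : Int)) 0 = if u ∈ marked then 1 else 0 := by
  unfold pvDictOf
  rw [pvDict_aux]
  simp [PySem.Dict.getD_empty]

theorem pvDictOf_append (marked : List (ℕ × ℕ)) (r : ℕ × ℕ) :
    pvDictOf (marked ++ [r]) = (pvDictOf marked).insert ((r.1 : Int), (r.2 : Int)) 1 := by
  unfold pvDictOf
  rw [List.foldl_append]
  rfl

theorem pvRes_inj (n n1 : ℕ) (hn : 0 < n) (c c' : ℕ × ℕ)
    (h1 : pvEnqB n c = true) (h2 : pvEnqB n c' = true) (h : pvRes n n1 c = pvRes n n1 c') :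
    c = c' ∨ (c = (0, 0) ∧ c' = (n, 0)) ∨ (c = (n, 0) ∧ c' = (0, 0)) := by
  obtain ⟨ca, cb⟩ := c
  obtain ⟨ca', cb'⟩ := c'
  simp only [pvEnqB, Bool.or_eq_true, Bool.and_eq_true, decide_eq_true_eq, Prod.mk.injEq] at h1 h2
  simp only [pvRes, Prod.mk.injEq] at h
  obtain ⟨hf, hs⟩ := h
  have hblt : cb < n := by rcases h1 with ⟨_, h⟩ | ⟨_, h⟩ <;> omega
  have hblt' : cb' < n := by rcases h2 with ⟨_, h⟩ | ⟨_, h⟩ <;> omega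
  have hbeq : cb = cb' := by
    have hmod : cb % n = cb' % n := by
      have := (Nat.ModEq.add_left_cancel' (n1 + n - 1) (hs : (n1 + n - 1 + cb) ≡ (n1 + n - 1 + cb') [MOD n]))
      exact this
    rwa [Nat.mod_eq_of_lt hblt, Nat.mod_eq_of_lt hblt'] at hmod
  subst hbeq
  rcases h1 with ⟨ha, _⟩ | ⟨ha, hb⟩ <;> rcases h2 with ⟨ha', _⟩ | ⟨ha', hb'⟩
  · left; rw [Nat.mod_eq_of_lt ha, Nat.mod_eq_of_lt ha'] at hf; simp [hf]
  · subst ha'; subst hb'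
    rw [Nat.mod_eq_of_lt ha, Nat.mod_self] at hf
    subst hf; right; left; simp
  · subst ha; subst hb
    rw [Nat.mod_self, Nat.mod_eq_of_lt ha'] at hf
    right; right; simp [hf.symm]
  · left; simp [ha, ha', hb, hb']

theorem pvEnq_level_bound (n : ℕ) (hn : 0 < n) (c : ℕ × ℕ) (h : pvEnqB n c = true) :
    c.1 + c.2 ≤ 2 * n - 1 := by
  simp only [pvEnqB, Bool.or_eq_true, Bool.and_eq_true, decide_eq_true_eq] at h
  rcases h with ⟨h1, h2⟩ | h
  · omega
  · have : c.1 = n ∧ c.2 = 0 := by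
      constructor <;> [exact congrArg Prod.fst h; exact congrArg Prod.snd h]
    omega

theorem pvEnq_contig (n : ℕ) (hn : 0 < n) (k : ℕ) (hk : 1 ≤ k)
    (h : ∀ c, pvEnqB n c = true → c.1 + c.2 ≠ k) :
    ∀ c, pvEnqB n c = true → c.1 + c.2 ≠ k + 1 := by
  intro c hc hsum
  simp only [pvEnqB, Bool.or_eq_true, Bool.and_eq_true, decide_eq_true_eq] at hc
  rcases hc with ⟨h1, h2⟩ | hw
  · rcases Nat.eq_zero_or_pos c.1 with hz | hpos
    · apply h (0, c.2 - 1)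
      · simp [pvEnqB]; omega
      · simp; omega
    · apply h (c.1 - 1, c.2)
      · simp [pvEnqB]; omega
      · simp; omega
  · have hw1 : c.1 = n := congrArg Prod.fst hw
    have hw2 : c.2 = 0 := congrArg Prod.snd hw
    apply h (n - 1, 0)
    · simp [pvEnqB]; omega
    · simp; omega

theorem pvRowPar_false (q : List Int) (n1 : ℕ) (S1 g : Int) (j : ℕ)
    (h : ∀ c, pvEnqB q.length c = true → c.1 + c.2 ≠ j) :
    pvRowPar q n1 S1 g j = false := by
  unfold pvRowPar
  rw [List.any_eq_false]
  intro x hx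
  simp only [Bool.and_eq_true, decide_eq_true_eq, Bool.not_eq_true, Bool.and_eq_false_iff]
  by_cases h1 : x ≤ j
  · by_cases h2 : pvEnqB q.length (x, j - x) = true
    · exact absurd (by simp; omega : (x, j - x).1 + (x, j - x).2 = j) (h _ h2)
    · simp [h1, h2]
  · simp [h1]

theorem pvFirstPar_none (q : List Int) (n1 : ℕ) (S1 g : Int) (hn : 0 < q.length) :
    ∀ (s k : ℕ), 1 ≤ k → (∀ c, pvEnqB q.length c = true → c.1 + c.2 ≠ k) →
    pvFirstPar q n1 S1 g s k = -1 := by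
  intro s
  induction s with
  | zero => intro k _ _; rfl
  | succ s ih =>
    intro k hk h
    unfold pvFirstPar
    rw [pvRowPar_false q n1 S1 g k h]
    simp only [Bool.false_eq_true, if_false]
    exact ih (k + 1) (by omega) (pvEnq_contig q.length hn k hk h)

theorem pvSortedLen (n : ℕ) (L : List (ℕ × ℕ)) (hs : L.Pairwise (fun p r => r.1 < p.1))
    (hb : ∀ c ∈ L, c.1 ≤ n) : L.length ≤ n + 1 := by
  have hnd : (L.map Prod.fst).Nodup :=
    List.pairwise_map.mpr (hs.imp (fun h => by omega))
  have hsub : (L.map Prod.fst) ⊆ (List.range (n + 1)) := by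
    intro x hx
    obtain ⟨c, hc, rfl⟩ := List.mem_map.mp hx
    exact List.mem_range.mpr (by have := hb c hc; omega)
  calc L.length = (L.map Prod.fst).length := (List.length_map ..).symm
    _ ≤ (List.range (n + 1)).length := (List.subperm_of_subset hnd hsub).length_le
    _ = n + 1 := List.length_range

theorem pvGenP_acc (n n1 : ℕ) (st : List (ℕ × ℕ) × List (ℕ × ℕ)) (p : ℕ × ℕ) :
    (pvGenP n n1 st p).1 = st.1 ++ (pvGenP n n1 ([], st.2) p).1 ∧
    (pvGenP n n1 st p).2 = (pvGenP n n1 ([], st.2) p).2 := by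
  unfold pvGenP pvGen1
  split_ifs with h1 h2 h2 <;> simp_all

theorem pvGenL_acc (n n1 : ℕ) (R : List (ℕ × ℕ)) : ∀ (st : List (ℕ × ℕ) × List (ℕ × ℕ)),
    (pvGenL n n1 st R).1 = st.1 ++ (pvGenL n n1 ([], st.2) R).1 ∧
    (pvGenL n n1 st R).2 = (pvGenL n n1 ([], st.2) R).2 := by
  induction R with
  | nil => intro st; simp [pvGenL]
  | cons p R ih =>
    intro st
    have hstep : pvGenL n n1 st (p :: R) = pvGenL n n1 (pvGenP n n1 st p) R := rfl
    have hstep' : pvGenL n n1 ([], st.2) (p :: R) = pvGenL n n1 (pvGenP n n1 ([], st.2) p) R := rfl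
    obtain ⟨hp1, hp2⟩ := pvGenP_acc n n1 st p
    obtain ⟨hL1, hL2⟩ := ih (pvGenP n n1 st p)
    obtain ⟨hL1', hL2'⟩ := ih (pvGenP n n1 ([], st.2) p)
    rw [hstep, hstep']
    rw [hL1, hL2, hL1', hL2', hp1, hp2]
    simp [List.append_assoc]

theorem pvAny_eq_rowPar (q : List Int) (n1 : ℕ) (S1 g : Int) (k : ℕ) (L : List (ℕ × ℕ))
    (hL : ∀ c, c ∈ L ↔ (pvEnqB q.length c = true ∧ c.1 + c.2 = k)) :
    L.any (pvHitB q n1 S1 g) = pvRowPar q n1 S1 g k := by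
  cases hA : L.any (pvHitB q n1 S1 g) <;> cases hB : pvRowPar q n1 S1 g k <;> try rfl
  · exfalso
    rw [pvRowPar, List.any_eq_true] at hB
    obtain ⟨x, _, hx⟩ := hB
    simp only [Bool.and_eq_true, decide_eq_true_eq] at hx
    obtain ⟨⟨hxk, henq⟩, hhit⟩ := hx
    have hmem : (x, k - x) ∈ L := (hL _).mpr ⟨henq, by simp; omega⟩
    rw [List.any_eq_false] at hA
    exact absurd hhit (by simpa using hA _ hmem)
  · exfalso
    rw [List.any_eq_true] at hA
    obtain ⟨c, hc, hhit⟩ := hA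
    obtain ⟨henq, hsum⟩ := (hL c).mp hc
    rw [pvRowPar, List.any_eq_false] at hB
    have hc1 : c.1 ≤ q.length := by
      simp only [pvEnqB, Bool.or_eq_true, Bool.and_eq_true, decide_eq_true_eq, Prod.mk.injEq] at henq
      rcases henq with ⟨h, _⟩ | ⟨h, _⟩ <;> omega
    have hcc : (c.1, k - c.1) = c := by
      obtain ⟨a, b⟩ := c; simp at hsum ⊢; omega
    have hmm := hB c.1 (List.mem_range.mpr (by omega))
    rw [hcc] at hmm
    apply hmm
    simp only [Bool.and_eq_true, decide_eq_true_eq]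
    exact ⟨⟨by omega, henq⟩, hhit⟩

theorem pvCand_iff (n : ℕ) (hn : 0 < n) (j cx cy : ℕ) (hsum : cx + cy = j + 1) :
    (∃ p : ℕ × ℕ, pvEnqB n p = true ∧ p.1 + p.2 = j ∧ ((cx, cy) = (p.1 + 1, p.2) ∨ (cx, cy) = (p.1, p.2 + 1)))
    ↔ ((cx ≤ n ∧ cy ≤ n ∧ ¬(cx = n ∧ cy = n ∧ 1 < n)) ∨ (cx = n + 1 ∧ cy = 0)) := by
  constructor
  · rintro ⟨⟨pa, pb⟩, hp, hpsum, hc | hc⟩ <;>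
      simp only [Prod.mk.injEq] at hc <;>
      obtain ⟨rfl, rfl⟩ := hc <;>
      simp only [pvEnqB, Bool.or_eq_true, Bool.and_eq_true, decide_eq_true_eq, Prod.mk.injEq] at hp <;>
      rcases hp with ⟨h1, h2⟩ | ⟨h1, h2⟩
    · left; omega
    · right; omega
    · left; omega
    · left; omega
  · rintro (⟨h1, h2, h3⟩ | ⟨h1, h2⟩)
    · by_cases hy0 : cy = 0
      · refine ⟨(cx - 1, 0), ?_, by omega, by left; simp; omega⟩
        simp only [pvEnqB, Bool.or_eq_true, Bool.and_eq_true, decide_eq_true_eq, Prod.mk.injEq]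
        left; constructor <;> omega
      · by_cases hx : cx = 0
        · refine ⟨(0, cy - 1), ?_, by omega, by right; simp; omega⟩
          simp only [pvEnqB, Bool.or_eq_true, Bool.and_eq_true, decide_eq_true_eq, Prod.mk.injEq]
          left; constructor <;> omega
        · by_cases hxn : cx = n
          · by_cases hyn : cy = n
            · have hone : n = 1 := by omega
              refine ⟨(n, 0), ?_, by omega, by right; simp; omega⟩
              simp [pvEnqB]
            · refine ⟨(n - 1, cy), ?_, by omega, by left; simp; omega⟩
              simp only [pvEnqB, Bool.or_eq_true, Bool.and_eq_true, decide_eq_true_eq, Prod.mk.injEq]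
              left; constructor <;> omega
          · by_cases hyn : cy = n
            · refine ⟨(cx, n - 1), ?_, by omega, by right; simp; omega⟩
              simp only [pvEnqB, Bool.or_eq_true, Bool.and_eq_true, decide_eq_true_eq, Prod.mk.injEq]
              left; constructor <;> omega
            · refine ⟨(cx - 1, cy), ?_, by omega, by left; simp; omega⟩
              simp only [pvEnqB, Bool.or_eq_true, Bool.and_eq_true, decide_eq_true_eq, Prod.mk.injEq]
              left; constructor <;> omega
    · refine ⟨(n, 0), by simp [pvEnqB], by omega, by left; simp; omega⟩

theorem pvRow_bridge (q : List Int) (n1 : ℕ) (S1 g : Int) (hn : 0 < q.length) (j : ℕ) :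
    pvRowPar q n1 S1 g j = pvRowC q n1 S1 g j := by
  have main : pvRowPar q n1 S1 g j = true ↔ pvRowC q n1 S1 g j = true := by
    constructor
    · intro h
      rw [pvRowPar, List.any_eq_true] at h
      obtain ⟨x, _, hx⟩ := h
      simp only [Bool.and_eq_true, decide_eq_true_eq] at hx
      obtain ⟨⟨hxj, henq⟩, hhit⟩ := hx
      rw [pvHitB, Bool.or_eq_true, decide_eq_true_eq, decide_eq_true_eq] at hhit
      have hcand : ∀ (cx cy : ℕ), cx + cy = j + 1 → pvF q n1 S1 cx cy = g →
          ((cx, cy) = (x + 1, j - x) ∨ (cx, cy) = (x, j - x + 1)) →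
          (pvRowC q n1 S1 g j = true) := by
        intro cx cy hcsum hfg hor
        have hpar : ∃ p : ℕ × ℕ, pvEnqB q.length p = true ∧ p.1 + p.2 = j ∧
            ((cx, cy) = (p.1 + 1, p.2) ∨ (cx, cy) = (p.1, p.2 + 1)) :=
          ⟨(x, j - x), henq, by simp; omega, hor⟩
        rw [pvCand_iff q.length hn j cx cy hcsum] at hpar
        rw [pvRowC, Bool.or_eq_true]
        rcases hpar with ⟨h1, h2, h3⟩ | ⟨h1, h2⟩
        · left
          rw [List.any_eq_true]
          refine ⟨cx, List.mem_range.mpr (by omega), ?_⟩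
          simp only [Bool.and_eq_true, decide_eq_true_eq, Bool.not_eq_true']
          refine ⟨⟨⟨⟨by omega, by omega⟩, by omega⟩, ?_⟩, ?_⟩
          · rw [Bool.and_eq_false_iff, Bool.and_eq_false_iff]
            by_cases hc1 : cx = q.length
            · by_cases hc2 : j + 1 - cx = q.length
              · right; simp; omega
              · left; right; simpa using hc2
            · left; left; simpa using hc1
          · have : j + 1 - cx = cy := by omega
            rw [this]; exact hfg
        · right
          simp only [Bool.and_eq_true, decide_eq_true_eq]
          constructor
          · omega
          · have h1' : cx = q.length + 1 := h1
            rw [h1', h2] at hfg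
            exact hfg
      rcases hhit with hf | hf
      · exact hcand (x + 1) (j - x) (by omega) hf (by left; rfl)
      · exact hcand x (j - x + 1) (by omega) hf (by right; rfl)
    · intro h
      rw [pvRowC, Bool.or_eq_true] at h
      have hcand : ∃ (cx cy : ℕ), cx + cy = j + 1 ∧ pvF q n1 S1 cx cy = g ∧
          ((cx ≤ q.length ∧ cy ≤ q.length ∧ ¬(cx = q.length ∧ cy = q.length ∧ 1 < q.length)) ∨
           (cx = q.length + 1 ∧ cy = 0)) := by
        rcases h with h | h
        · rw [List.any_eq_true] at h
          obtain ⟨x, _, hx⟩ := h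
          simp only [Bool.and_eq_true, decide_eq_true_eq, Bool.not_eq_true'] at hx
          obtain ⟨⟨⟨⟨hb1, hb2⟩, hb3⟩, hb4⟩, hb5⟩ := hx
          refine ⟨x, j + 1 - x, by omega, hb5, Or.inl ⟨hb3, by omega, ?_⟩⟩
          rintro ⟨hc1, hc2, hc3⟩
          rw [Bool.and_eq_false_iff, Bool.and_eq_false_iff] at hb4
          rcases hb4 with (hx1 | hx1) | hx1 <;> simp at hx1 <;> omega
        · simp only [Bool.and_eq_true, decide_eq_true_eq] at h
          exact ⟨q.length + 1, 0, by omega, h.2, Or.inr ⟨rfl, rfl⟩⟩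
      obtain ⟨cx, cy, hcsum, hfg, hshape⟩ := hcand
      have hpar := (pvCand_iff q.length hn j cx cy hcsum).mpr hshape
      obtain ⟨p, hpe, hpsum, hpc⟩ := hpar
      rw [pvRowPar, List.any_eq_true]
      have hp1 : p.1 ≤ q.length := by
        simp only [pvEnqB, Bool.or_eq_true, Bool.and_eq_true, decide_eq_true_eq, Prod.mk.injEq] at hpe
        rcases hpe with ⟨h, _⟩ | ⟨h, _⟩ <;> omega
      refine ⟨p.1, List.mem_range.mpr (by omega), ?_⟩
      have hpp : (p.1, j - p.1) = p := by
        obtain ⟨a, b⟩ := p; simp at hpsum ⊢; omega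
      rw [hpp]
      simp only [Bool.and_eq_true, decide_eq_true_eq]
      refine ⟨⟨by omega, hpe⟩, ?_⟩
      rw [pvHitB, Bool.or_eq_true, decide_eq_true_eq, decide_eq_true_eq]
      rcases hpc with hc | hc <;> simp only [Prod.mk.injEq] at hc
      · left; rw [hc.1, hc.2] at hfg; exact hfg
      · right; rw [hc.1, hc.2] at hfg; exact hfg
  cases hA : pvRowPar q n1 S1 g j <;> cases hB : pvRowC q n1 S1 g j <;> try rfl
  · exact absurd (main.mpr hB) (by simp [hA])
  · exact absurd (main.mp hA) (by simp [hB])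

theorem pvFirst_bridge (q : List Int) (n1 : ℕ) (S1 g : Int) (hn : 0 < q.length) :
    ∀ (s j : ℕ), pvFirstPar q n1 S1 g s j = pvFirstC q n1 S1 g s j := by
  intro s
  induction s with
  | zero => intro j; rfl
  | succ s ih =>
    intro j
    unfold pvFirstPar pvFirstC
    rw [pvRow_bridge q n1 S1 g hn j, ih (j + 1)]

theorem pvDictOf_getD' (marked : List (ℕ × ℕ)) (u v : ℕ) :
    (pvDictOf marked).getD ((u : Int), (v : Int)) 0 = if (u, v) ∈ marked then 1 else 0 :=
  pvDictOf_getD marked (u, v)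

theorem pvDictOf_append' (marked : List (ℕ × ℕ)) (u v : ℕ) :
    (pvDictOf marked).insert ((u : Int), (v : Int)) 1 = pvDictOf (marked ++ [(u, v)]) :=
  (pvDictOf_append marked (u, v)).symm

theorem pvStep (q : List Int) (n1 : ℕ) (S1 g : Int) (hn : 0 < q.length)
    (a b : ℕ) (ct : Int)
    (hct : ct.emod (q.length : Int) = (((n1 + q.length - 1 + b) % q.length : ℕ) : Int))
    (rest : List (Int × Int × Int × Int)) (marked : List (ℕ × ℕ)) (fuel : ℕ) :
    bfsA q (q.length : Int) g (fuel + 1)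
        ((((a % q.length : ℕ) : Int), ct, pvF q n1 S1 a b, ((a + b : ℕ) : Int)) :: rest)
        (pvDictOf marked) =
      if pvF q n1 S1 (a + 1) b = g then ((a + b : ℕ) : Int) + 1
      else if pvF q n1 S1 a (b + 1) = g then ((a + b : ℕ) : Int) + 1
      else bfsA q (q.length : Int) g fuel
        (rest ++ ((pvGenP q.length n1 ([], marked) (a, b)).1.map (pvEnc q n1 S1)))
        (pvDictOf (pvGenP q.length n1 ([], marked) (a, b)).2) := by
  have hnI : (0 : Int) < (q.length : Int) := by exact_mod_cast hn
  have hmod : ∀ x : Int, PySem.Int.mod x (q.length : Int) = x % (q.length : Int) :=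
    fun x => PySem.Int.mod_eq_emod_of_pos hnI
  have hct' : ct % (q.length : Int) = (((n1 + q.length - 1 + b) % q.length : ℕ) : Int) := hct
  have hcast : ∀ m : ℕ, ((m : ℕ) : Int) % ((q.length : ℕ) : Int) = ((m % q.length : ℕ) : Int) :=
    fun m => (Int.natCast_mod m q.length).symm
  have h0 : PySem.Int.mod (((a % q.length : ℕ) : Int) + 1) (q.length : Int)
      = (((a + 1) % q.length : ℕ) : Int) := by
    rw [hmod, show (((a % q.length : ℕ) : Int) + 1) = (((a % q.length + 1 : ℕ) : ℕ) : Int) by push_cast; ring,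
       hcast]
    exact congrArg _ ((Nat.mod_modEq a q.length).add_right 1)
  have hA : PySem.Int.mod (ct + 0) (q.length : Int) = (((n1 + q.length - 1 + b) % q.length : ℕ) : Int) := by
    rw [add_zero, hmod]; exact hct'
  have hB : PySem.Int.mod (((a % q.length : ℕ) : Int) + 0) (q.length : Int) = ((a % q.length : ℕ) : Int) := by
    rw [add_zero, hmod, hcast]
    exact congrArg _ (Nat.mod_mod_of_dvd a dvd_rfl)
  have hC : PySem.Int.mod (ct + 1) (q.length : Int) = (((n1 + q.length - 1 + (b + 1)) % q.length : ℕ) : Int) := by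
    rw [hmod, Int.add_emod, hct']
    rw [show ((1 : Int) % (q.length : Int)) = ((1 % q.length : ℕ) : Int) from by
          rw [show (1 : Int) = ((1 : ℕ) : Int) by norm_num, hcast]]
    rw [show ((((n1 + q.length - 1 + b) % q.length : ℕ) : Int) + ((1 % q.length : ℕ) : Int))
          = (((n1 + q.length - 1 + b) % q.length + 1 % q.length : ℕ) : Int) by push_cast; ring, hcast]
    refine congrArg _ ?_
    conv_rhs => rw [show n1 + q.length - 1 + (b + 1) = (n1 + q.length - 1 + b) + 1 by omega, Nat.add_mod]
  have hget1 : PySem.List.pyGetD q ((a % q.length : ℕ) : Int) 0 = q.getD (a % q.length) 0 :=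
    PySem.List.pyGetD_natCast q _ 0
  have hget2 : PySem.List.pyGetD q (((n1 + q.length - 1 + (b + 1)) % q.length : ℕ) : Int) 0
      = q.getD ((n1 + q.length - 1 + (b + 1)) % q.length) 0 := PySem.List.pyGetD_natCast q _ 0
  have hf1 : pvF q n1 S1 a b - q.getD (a % q.length) 0 = pvF q n1 S1 (a + 1) b := by
    simp [pvF, pvP]; ring
  have hidx : (n1 + q.length - 1 + (b + 1)) % q.length = (n1 + b) % q.length := by
    rw [show n1 + q.length - 1 + (b + 1) = (n1 + b) + q.length by omega, Nat.add_mod_right]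
  have hf2 : pvF q n1 S1 a b + q.getD ((n1 + q.length - 1 + (b + 1)) % q.length) 0 = pvF q n1 S1 a (b + 1) := by
    rw [hidx]; simp [pvF, pvQ]; ring
  have hcnt1 : (((a + 1) + b : ℕ) : Int) = ((a + b : ℕ) : Int) + 1 := by push_cast; ring
  have hcnt2 : ((a + (b + 1) : ℕ) : Int) = ((a + b : ℕ) : Int) + 1 := by push_cast; ring
  rw [bfsA]
  simp only [h0, hA, hB, hC, hget1, hget2, hf1, hf2]
  by_cases hg1 : pvF q n1 S1 (a + 1) b = g
  · rw [if_pos hg1, if_pos hg1]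
  · rw [if_neg hg1, if_neg hg1]
    by_cases hg2 : pvF q n1 S1 a (b + 1) = g
    · rw [if_pos hg2, if_pos hg2]
    · rw [if_neg hg2, if_neg hg2]
      simp only [pvDictOf_getD']
      by_cases hm1 : (((a + 1) % q.length, (n1 + q.length - 1 + b) % q.length) : ℕ × ℕ) ∈ marked
      · have hg1' : pvGen1 q.length n1 ([], marked) (a + 1, b) = ([], marked) := by
          unfold pvGen1; rw [if_pos (by simpa [pvRes] using hm1)]
        rw [if_pos hm1]
        rw [if_neg (by decide : ¬(1 : Int) = 0)]
        simp only [pvDictOf_getD']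
        by_cases hm2 : ((a % q.length, (n1 + q.length - 1 + (b + 1)) % q.length) : ℕ × ℕ) ∈ marked
        · rw [if_pos hm2]
          rw [if_neg (by decide : ¬(1 : Int) = 0)]
          have hGP : pvGenP q.length n1 ([], marked) (a, b) = ([], marked) := by
            unfold pvGenP
            rw [hg1']
            unfold pvGen1
            rw [if_pos (by simpa [pvRes] using hm2)]
          rw [hGP]
          simp
        · rw [if_neg hm2]
          rw [if_pos rfl]
          have hGP : pvGenP q.length n1 ([], marked) (a, b)
              = ([(a, b + 1)], marked ++ [(a % q.length, (n1 + q.length - 1 + (b + 1)) % q.length)]) := by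
            unfold pvGenP
            rw [hg1']
            unfold pvGen1
            rw [if_neg (by simpa [pvRes] using hm2)]
            simp [pvRes]
          rw [hGP, pvDictOf_append']
          simp only [List.map_cons, List.map_nil, pvEnc]
          rw [hcnt2]
      · have hg1' : pvGen1 q.length n1 ([], marked) (a + 1, b)
            = ([(a + 1, b)], marked ++ [((a + 1) % q.length, (n1 + q.length - 1 + b) % q.length)]) := by
          unfold pvGen1
          rw [if_neg (by simpa [pvRes] using hm1)]
          simp [pvRes]
        rw [if_neg hm1]
        rw [if_pos rfl]
        rw [pvDictOf_append']
        simp only [pvDictOf_getD']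
        by_cases hm2 : (((a % q.length, (n1 + q.length - 1 + (b + 1)) % q.length)) : ℕ × ℕ)
            ∈ marked ++ [((a + 1) % q.length, (n1 + q.length - 1 + b) % q.length)]
        · rw [if_pos hm2]
          rw [if_neg (by decide : ¬(1 : Int) = 0)]
          have hGP : pvGenP q.length n1 ([], marked) (a, b)
              = ([(a + 1, b)], marked ++ [((a + 1) % q.length, (n1 + q.length - 1 + b) % q.length)]) := by
            unfold pvGenP
            rw [hg1']
            unfold pvGen1
            rw [if_pos (by simpa [pvRes] using hm2)]
          rw [hGP]
          simp only [List.map_cons, List.map_nil, pvEnc]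
          rw [hcnt1]
        · rw [if_neg hm2]
          rw [if_pos rfl]
          rw [pvDictOf_append']
          have hGP : pvGenP q.length n1 ([], marked) (a, b)
              = ([(a + 1, b), (a, b + 1)],
                 (marked ++ [((a + 1) % q.length, (n1 + q.length - 1 + b) % q.length)])
                   ++ [(a % q.length, (n1 + q.length - 1 + (b + 1)) % q.length)]) := by
            unfold pvGenP
            rw [hg1']
            unfold pvGen1
            rw [if_neg (by simpa [pvRes] using hm2)]
            simp [pvRes]
          rw [hGP]
          simp only [List.map_cons, List.map_nil, pvEnc]
          rw [hcnt1, hcnt2]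
          simp [List.append_assoc]

theorem pvLevel (q : List Int) (n1 : ℕ) (S1 g : Int) (hn : 0 < q.length) (k : ℕ) :
    ∀ (R : List (ℕ × ℕ)), (∀ c ∈ R, c.1 + c.2 = k) →
    ∀ (D : List (Int × Int × Int × Int)) (marked : List (ℕ × ℕ)) (fuel : ℕ),
    bfsA q (q.length : Int) g (R.length + fuel) (R.map (pvEnc q n1 S1) ++ D) (pvDictOf marked) =
      if R.any (pvHitB q n1 S1 g) then ((k : Int) + 1)
      else bfsA q (q.length : Int) g fuel
        (D ++ (pvGenL q.length n1 ([], marked) R).1.map (pvEnc q n1 S1))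
        (pvDictOf (pvGenL q.length n1 ([], marked) R).2) := by
  intro R
  induction R with
  | nil =>
    intro _ D marked fuel
    simp [pvGenL]
  | cons p R ih =>
    intro hsum D marked fuel
    have hps : p.1 + p.2 = k := hsum p (List.mem_cons_self ..)
    have hlen : (p :: R).length + fuel = (R.length + fuel) + 1 := by
      simp [List.length_cons]; omega
    rw [hlen]
    have hmap : (p :: R).map (pvEnc q n1 S1) ++ D
        = (pvEnc q n1 S1 p) :: (R.map (pvEnc q n1 S1) ++ D) := by simp
    rw [hmap]
    have hctp : ((((n1 + q.length - 1 + p.2) % q.length : ℕ) : Int)).emod (q.length : Int)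
        = (((n1 + q.length - 1 + p.2) % q.length : ℕ) : Int) :=
      Int.emod_eq_of_lt (by positivity) (by exact_mod_cast Nat.mod_lt _ hn)
    have hstep := pvStep q n1 S1 g hn p.1 p.2 _ hctp (R.map (pvEnc q n1 S1) ++ D) marked (R.length + fuel)
    have hencp : pvEnc q n1 S1 p
        = ((((p.1 % q.length : ℕ) : Int)), (((n1 + q.length - 1 + p.2) % q.length : ℕ) : Int),
           pvF q n1 S1 p.1 p.2, ((p.1 + p.2 : ℕ) : Int)) := rfl
    rw [hencp, hstep]
    have hany : (p :: R).any (pvHitB q n1 S1 g)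
        = (pvHitB q n1 S1 g p || R.any (pvHitB q n1 S1 g)) := by simp
    rw [hany]
    by_cases hh1 : pvF q n1 S1 (p.1 + 1) p.2 = g
    · rw [if_pos hh1]
      have : pvHitB q n1 S1 g p = true := by simp [pvHitB, hh1]
      rw [this]
      simp only [Bool.true_or, if_true]
      rw [hps]
    · rw [if_neg hh1]
      by_cases hh2 : pvF q n1 S1 p.1 (p.2 + 1) = g
      · rw [if_pos hh2]
        have : pvHitB q n1 S1 g p = true := by simp [pvHitB, hh2]
        rw [this]
        simp only [Bool.true_or, if_true]
        rw [hps]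
      · rw [if_neg hh2]
        have hhp : pvHitB q n1 S1 g p = false := by simp [pvHitB, hh1, hh2]
        rw [hhp, Bool.false_or]
        have hre : (R.map (pvEnc q n1 S1) ++ D) ++ ((pvGenP q.length n1 ([], marked) (p.1, p.2)).1.map (pvEnc q n1 S1))
            = R.map (pvEnc q n1 S1) ++ (D ++ ((pvGenP q.length n1 ([], marked) (p.1, p.2)).1.map (pvEnc q n1 S1))) := by
          simp [List.append_assoc]
        rw [hre]
        rw [ih (fun c hc => hsum c (List.mem_cons_of_mem _ hc))
            (D ++ ((pvGenP q.length n1 ([], marked) (p.1, p.2)).1.map (pvEnc q n1 S1)))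
            (pvGenP q.length n1 ([], marked) (p.1, p.2)).2 fuel]
        have hcons : pvGenL q.length n1 ([], marked) ((p.1, p.2) :: R) = pvGenL q.length n1 (pvGenP q.length n1 ([], marked) (p.1, p.2)) R := rfl
        have hppair : (p.1, p.2) = p := rfl
        rw [hppair] at hcons
        obtain ⟨hacc1, hacc2⟩ := pvGenL_acc q.length n1 R (pvGenP q.length n1 ([], marked) p)
        rw [hcons, hacc1, hacc2, hppair]
        simp [List.append_assoc]

theorem pvEnqB_iff (n : ℕ) (c : ℕ × ℕ) :
    pvEnqB n c = true ↔ ((c.1 < n ∧ c.2 < n) ∨ (c.1 = n ∧ c.2 = 0)) := by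
  simp [pvEnqB, Prod.ext_iff]

theorem pvRes_wrap (n n1 b : ℕ) : pvRes n n1 (n, b) = pvRes n n1 (0, b) := by
  simp [pvRes, Nat.mod_self]

theorem pvRes_np1 (n n1 : ℕ) : pvRes n n1 (n + 1, 0) = pvRes n n1 (1, 0) := by
  simp only [pvRes, Prod.mk.injEq]
  exact ⟨Nat.add_mod_left n 1, by simp⟩

theorem pvRes_snd_wrap (n n1 a b : ℕ) (hn : 0 < n) : pvRes n n1 (a, b + n) = pvRes n n1 (a, b) := by
  simp only [pvRes, Prod.mk.injEq]
  refine ⟨by simp, ?_⟩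
  rw [show n1 + n - 1 + (b + n) = (n1 + n - 1 + b) + n by omega, Nat.add_mod_right]

theorem pvGen1_mem_acc (n n1 : ℕ) (st : List (ℕ × ℕ) × List (ℕ × ℕ)) (c x : ℕ × ℕ) :
    x ∈ (pvGen1 n n1 st c).1 ↔ (x ∈ st.1 ∨ (pvRes n n1 c ∉ st.2 ∧ x = c)) := by
  unfold pvGen1
  split_ifs with h <;> simp [h]

theorem pvGen1_mem_marked (n n1 : ℕ) (st : List (ℕ × ℕ) × List (ℕ × ℕ)) (c : ℕ × ℕ) (r : ℕ × ℕ) :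
    r ∈ (pvGen1 n n1 st c).2 ↔ (r ∈ st.2 ∨ (pvRes n n1 c ∉ st.2 ∧ r = pvRes n n1 c)) := by
  unfold pvGen1
  split_ifs with h <;> simp [h]

theorem pvGen1_pairwise (n n1 : ℕ) (st : List (ℕ × ℕ) × List (ℕ × ℕ)) (c : ℕ × ℕ)
    (hs : st.1.Pairwise (fun p r => r.1 < p.1))
    (hc : pvRes n n1 c ∉ st.2 → ∀ x ∈ st.1, c.1 < x.1) :
    (pvGen1 n n1 st c).1.Pairwise (fun p r => r.1 < p.1) := by
  unfold pvGen1
  split_ifs with h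
  · exact hs
  · rw [List.pairwise_append]
    exact ⟨hs, List.pairwise_singleton _ _, fun x hx y hy => by
      rw [List.mem_singleton] at hy; subst hy; exact hc h x hx⟩

theorem pvGenGo (n n1 : ℕ) (hn : 0 < n) (k : ℕ) :
    ∀ (R : List (ℕ × ℕ)), ∀ (acc marked : List (ℕ × ℕ)) (t : ℕ),
    (∀ c, c ∈ R ↔ (pvEnqB n c = true ∧ c.1 + c.2 = k ∧ c.1 < t)) →
    R.Pairwise (fun p r => r.1 < p.1) →
    (∀ c, c ∈ acc ↔ (pvEnqB n c = true ∧ c.1 + c.2 = k + 1 ∧ (t + 1 ≤ c.1 ∨ (c.1 = t ∧ 1 ≤ c.2)))) →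
    acc.Pairwise (fun p r => r.1 < p.1) →
    (∀ r, r ∈ marked ↔ ((∃ c, pvEnqB n c = true ∧ 1 ≤ c.1 + c.2 ∧ c.1 + c.2 ≤ k ∧ pvRes n n1 c = r) ∨
                        (∃ c, c ∈ acc ∧ pvRes n n1 c = r))) →
    (∀ c, c ∈ (pvGenL n n1 (acc, marked) R).1 ↔ (pvEnqB n c = true ∧ c.1 + c.2 = k + 1)) ∧
    (pvGenL n n1 (acc, marked) R).1.Pairwise (fun p r => r.1 < p.1) ∧
    (∀ r, r ∈ (pvGenL n n1 (acc, marked) R).2 ↔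
      ∃ c, pvEnqB n c = true ∧ 1 ≤ c.1 + c.2 ∧ c.1 + c.2 ≤ k + 1 ∧ pvRes n n1 c = r) := by
  intro R
  induction R with
  | nil =>
    intro acc marked t hR hRs hacc haccs hm
    simp only [pvGenL, List.foldl_nil]
    have haccfull : ∀ c, c ∈ acc ↔ (pvEnqB n c = true ∧ c.1 + c.2 = k + 1) := by
      intro c
      rw [hacc c]
      constructor
      · rintro ⟨h1, h2, _⟩; exact ⟨h1, h2⟩
      · rintro ⟨h1, h2⟩
        refine ⟨h1, h2, ?_⟩
        by_contra hnp
        push_neg at hnp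
        obtain ⟨hle, himp⟩ := hnp
        rcases (pvEnqB_iff n c).mp h1 with ⟨hc1, hc2⟩ | ⟨hc1, hc2⟩
        · rcases Nat.eq_zero_or_pos c.2 with hz | hpos
          · have hmem := (hR (c.1 - 1, 0)).mpr
              ⟨(pvEnqB_iff n _).mpr (by left; constructor <;> simp <;> omega), by simp; omega, by simp; omega⟩
            simp at hmem
          · have hlt : c.1 < t := by
              rcases Nat.lt_or_ge c.1 t with h | h
              · exact h
              · have he : c.1 = t := by omega
                have := himp he
                omega
            have hmem := (hR (c.1, c.2 - 1)).mpr
              ⟨(pvEnqB_iff n _).mpr (by left; simp; omega), by simp; omega, by simp; omega⟩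
            simp at hmem
        · have hmem := (hR (n - 1, 0)).mpr
            ⟨(pvEnqB_iff n _).mpr (by left; simp; omega), by simp; omega, by simp; omega⟩
          simp at hmem
    refine ⟨haccfull, haccs, ?_⟩
    intro r
    rw [hm r]
    constructor
    · rintro (⟨c, h1, h2, h3, h4⟩ | ⟨c, hc, h4⟩)
      · exact ⟨c, h1, h2, by omega, h4⟩
      · obtain ⟨h1, h2⟩ := (haccfull c).mp hc
        exact ⟨c, h1, by omega, by omega, h4⟩
    · rintro ⟨c, h1, h2, h3, h4⟩
      by_cases hk : c.1 + c.2 ≤ k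
      · exact Or.inl ⟨c, h1, h2, hk, h4⟩
      · exact Or.inr ⟨c, (haccfull c).mpr ⟨h1, by omega⟩, h4⟩
  | cons p R' ih =>
    intro acc marked t hR hRs hacc haccs hm
    obtain ⟨a0, b0⟩ := p
    obtain ⟨hpE, hpsum, hpt⟩ := (hR (a0, b0)).mp (List.mem_cons_self ..)
    simp only at hpsum hpt
    have hRmax : ∀ c ∈ R', c.1 < a0 := fun c hc => (List.pairwise_cons.mp hRs).1 c hc
    have hR' : ∀ c, c ∈ R' ↔ (pvEnqB n c = true ∧ c.1 + c.2 = k ∧ c.1 < a0) := by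
      intro c
      constructor
      · intro hc
        obtain ⟨h1, h2, _⟩ := (hR c).mp (List.mem_cons_of_mem _ hc)
        exact ⟨h1, h2, hRmax c hc⟩
      · rintro ⟨h1, h2, h3⟩
        rcases List.mem_cons.mp ((hR c).mpr ⟨h1, h2, by omega⟩) with heq | hc
        · rw [heq] at h3; simp at h3
        · exact hc
    have haccR : ∀ c ∈ acc, a0 + 1 ≤ c.1 := by
      intro c hc
      obtain ⟨_, _, hp⟩ := (hacc c).mp hc
      omega
    have hc2acc : (a0, b0 + 1) ∉ acc := by
      intro hc
      have := haccR _ hc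
      simp at this
    have hfresh1 : (pvRes n n1 (a0 + 1, b0) ∈ marked) ↔
        ¬(pvEnqB n (a0 + 1, b0) = true ∧ (a0 + 1, b0) ∉ acc) := by
      constructor
      · intro hr
        rintro ⟨hE, hacc1⟩
        rcases (hm _).mp hr with ⟨c', h1, h2, h3, h4⟩ | ⟨c', hc', h4⟩
        · rcases pvRes_inj n n1 hn c' (a0 + 1, b0) h1 hE h4 with heq | ⟨hA, hB⟩ | ⟨hA, hB⟩
          · rw [heq] at h3; simp at h3; omega
          · rw [hA] at h2; simp at h2
          · simp at hB
        · have hc'mem := (hacc c').mp hc'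
          rcases pvRes_inj n n1 hn c' (a0 + 1, b0) hc'mem.1 hE h4 with heq | ⟨hA, hB⟩ | ⟨hA, hB⟩
          · exact hacc1 (heq ▸ hc')
          · rw [hA] at hc'mem; simp at hc'mem
          · simp at hB
      · intro hne
        by_cases hE : pvEnqB n (a0 + 1, b0) = true
        · have hc1acc : (a0 + 1, b0) ∈ acc := by
            by_contra hno
            exact hne ⟨hE, hno⟩
          exact (hm _).mpr (Or.inr ⟨(a0 + 1, b0), hc1acc, rfl⟩)
        · rcases (pvEnqB_iff n (a0, b0)).mp hpE with ⟨hA1, hA2⟩ | ⟨hA1, hA2⟩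
          · simp only at hA1 hA2
            have hn1 : a0 + 1 = n ∧ 1 ≤ b0 := by
              have hx := (pvEnqB_iff n (a0 + 1, b0)).not.mp (by simp [hE])
              push_neg at hx
              obtain ⟨hx1, hx2⟩ := hx
              simp only at hx1 hx2
              constructor
              · omega
              · by_contra hb
                exact absurd (hx2 (by omega)) (by omega)
            apply (hm _).mpr
            refine Or.inl ⟨(0, b0), (pvEnqB_iff n _).mpr (by left; simp; omega), by simp; omega, by simp; omega, ?_⟩
            rw [show ((a0 + 1, b0) : ℕ × ℕ) = (n, b0) by simp; omega, pvRes_wrap]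
          · simp only at hA1 hA2
            apply (hm _).mpr
            refine Or.inl ⟨(1, 0), ?_, by simp, by simp; omega, ?_⟩
            · rcases Nat.lt_or_ge 1 n with h | h
              · exact (pvEnqB_iff n _).mpr (by left; simp; omega)
              · exact (pvEnqB_iff n _).mpr (by right; simp; omega)
            · rw [show ((a0 + 1, b0) : ℕ × ℕ) = (n + 1, 0) by simp; omega, pvRes_np1]
    have hfresh2 : (pvRes n n1 (a0, b0 + 1) ∈ (pvGen1 n n1 (acc, marked) (a0 + 1, b0)).2) ↔
        ¬(pvEnqB n (a0, b0 + 1) = true) := by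
      constructor
      · intro hr hE
        rcases (pvGen1_mem_marked n n1 (acc, marked) (a0 + 1, b0) _).mp hr with hr | ⟨hfr, h4⟩
        · rcases (hm _).mp hr with ⟨c', h1, h2, h3, h4⟩ | ⟨c', hc', h4⟩
          · rcases pvRes_inj n n1 hn c' (a0, b0 + 1) h1 hE h4 with heq | ⟨hA, hB⟩ | ⟨hA, hB⟩
            · rw [heq] at h3; simp at h3; omega
            · simp at hB
            · simp at hB
          · have hc'mem := (hacc c').mp hc'
            rcases pvRes_inj n n1 hn c' (a0, b0 + 1) hc'mem.1 hE h4 with heq | ⟨hA, hB⟩ | ⟨hA, hB⟩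
            · exact hc2acc (heq ▸ hc')
            · simp at hB
            · simp at hB
        · have hE1 : pvEnqB n (a0 + 1, b0) = true := by
            by_contra hno
            exact hfr (hfresh1.mpr (fun hand => hno hand.1))
          rcases pvRes_inj n n1 hn (a0, b0 + 1) (a0 + 1, b0) hE hE1 h4 with heq | ⟨hA, hB⟩ | ⟨hA, hB⟩
          · simp at heq
          · simp at hA
          · simp at hA
      · intro hE
        apply (pvGen1_mem_marked n n1 (acc, marked) (a0 + 1, b0) _).mpr
        rcases (pvEnqB_iff n (a0, b0)).mp hpE with ⟨hA1, hA2⟩ | ⟨hA1, hA2⟩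
        · simp only at hA1 hA2
          have hb1 : b0 + 1 = n := by
            have hx := (pvEnqB_iff n (a0, b0 + 1)).not.mp (by simp [hE])
            push_neg at hx
            obtain ⟨hx1, hx2⟩ := hx
            simp only at hx1 hx2
            by_contra hb
            exact absurd (hx1 (by omega)) (by omega)
          rcases Nat.eq_zero_or_pos a0 with ha00 | ha0pos
          · rcases Nat.lt_or_ge 1 n with hn2 | hn1
            · left
              have ht1 : t ≤ 1 := by
                by_contra hti
                have hmem := (hR (1, n - 2)).mpr
                  ⟨(pvEnqB_iff n _).mpr (by left; simp; omega), by simp; omega, by simp; omega⟩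
                rcases List.mem_cons.mp hmem with heq | hmem'
                · simp at heq; omega
                · have := hRmax _ hmem'; simp at this; omega
              apply (hm _).mpr
              refine Or.inr ⟨(n, 0), (hacc _).mpr ⟨?_, by simp; omega, by simp; omega⟩, ?_⟩
              · exact (pvEnqB_iff n _).mpr (by right; simp)
              · rw [show ((a0, b0 + 1) : ℕ × ℕ) = (0, 0 + n) by simp; omega,
                    pvRes_snd_wrap n n1 0 0 hn, ← pvRes_wrap]
            · have hn1' : n = 1 := by omega
              have hb00 : b0 = 0 := by omega
              have hEc1 : pvEnqB n (a0 + 1, b0) = true :=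
                (pvEnqB_iff n _).mpr (Or.inr (by simp; omega))
              have hnacc : (a0 + 1, b0) ∉ acc := by
                intro hc
                obtain ⟨_, _, hp⟩ := (hacc _).mp hc
                simp only at hp
                omega
              right
              refine ⟨fun hin => (hfresh1.mp hin) ⟨hEc1, hnacc⟩, ?_⟩
              subst hn1' hb00 ha00
              simp [pvRes]
          · left
            apply (hm _).mpr
            refine Or.inl ⟨(a0, 0), (pvEnqB_iff n _).mpr (by left; simp; omega), by simp; omega, by simp; omega, ?_⟩
            rw [show ((a0, b0 + 1) : ℕ × ℕ) = (a0, 0 + n) by simp; omega, pvRes_snd_wrap n n1 a0 0 hn]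
        · simp only at hA1 hA2
          left
          apply (hm _).mpr
          rcases Nat.lt_or_ge 1 n with hn2 | hn1
          · refine Or.inl ⟨(0, 1), (pvEnqB_iff n _).mpr (by left; simp; omega), by simp, by simp; omega, ?_⟩
            rw [show ((a0, b0 + 1) : ℕ × ℕ) = (n, 1) by simp; omega, pvRes_wrap]
          · have hn1' : n = 1 := by omega
            refine Or.inl ⟨(1, 0), (pvEnqB_iff n _).mpr (by right; simp; omega), by simp, by simp; omega, ?_⟩
            rw [show ((a0, b0 + 1) : ℕ × ℕ) = (1, b0 + 1) by simp; omega]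
            subst hn1'
            simp [pvRes, Nat.mod_one]
    have hfr1cond : pvRes n n1 (a0 + 1, b0) ∉ marked ↔
        (pvEnqB n (a0 + 1, b0) = true ∧ (a0 + 1, b0) ∉ acc) := by
      constructor
      · intro h
        by_contra hno
        exact h (hfresh1.mpr hno)
      · intro h hin
        exact (hfresh1.mp hin) h
    have hfr2cond : pvRes n n1 (a0, b0 + 1) ∉ (pvGen1 n n1 (acc, marked) (a0 + 1, b0)).2 ↔
        pvEnqB n (a0, b0 + 1) = true := by
      constructor
      · intro h
        by_contra hno
        exact h (hfresh2.mpr hno)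
      · intro h hin
        exact (hfresh2.mp hin) h
    have hgenP : pvGenP n n1 (acc, marked) (a0, b0)
        = pvGen1 n n1 (pvGen1 n n1 (acc, marked) (a0 + 1, b0)) (a0, b0 + 1) := rfl
    have hst2acc : ∀ c, c ∈ (pvGenP n n1 (acc, marked) (a0, b0)).1 ↔
        (c ∈ acc ∨ (pvEnqB n (a0 + 1, b0) = true ∧ (a0 + 1, b0) ∉ acc ∧ c = (a0 + 1, b0)) ∨
         (pvEnqB n (a0, b0 + 1) = true ∧ c = (a0, b0 + 1))) := by
      intro c
      rw [hgenP, pvGen1_mem_acc, pvGen1_mem_acc]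
      constructor
      · rintro ((h | ⟨hf, rfl⟩) | ⟨hf, rfl⟩)
        · exact Or.inl h
        · obtain ⟨hE, hn2⟩ := hfr1cond.mp hf
          exact Or.inr (Or.inl ⟨hE, hn2, rfl⟩)
        · exact Or.inr (Or.inr ⟨hfr2cond.mp hf, rfl⟩)
      · rintro (h | ⟨hE, hn2, rfl⟩ | ⟨hE, rfl⟩)
        · exact Or.inl (Or.inl h)
        · exact Or.inl (Or.inr ⟨hfr1cond.mpr ⟨hE, hn2⟩, rfl⟩)
        · exact Or.inr ⟨hfr2cond.mpr hE, rfl⟩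
    have hst2m : ∀ r, r ∈ (pvGenP n n1 (acc, marked) (a0, b0)).2 ↔
        (r ∈ marked ∨ (pvEnqB n (a0 + 1, b0) = true ∧ (a0 + 1, b0) ∉ acc ∧ r = pvRes n n1 (a0 + 1, b0)) ∨
         (pvEnqB n (a0, b0 + 1) = true ∧ r = pvRes n n1 (a0, b0 + 1))) := by
      intro r
      rw [hgenP, pvGen1_mem_marked, pvGen1_mem_marked]
      constructor
      · rintro ((h | ⟨hf, rfl⟩) | ⟨hf, rfl⟩)
        · exact Or.inl h
        · obtain ⟨hE, hn2⟩ := hfr1cond.mp hf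
          exact Or.inr (Or.inl ⟨hE, hn2, rfl⟩)
        · exact Or.inr (Or.inr ⟨hfr2cond.mp hf, rfl⟩)
      · rintro (h | ⟨hE, hn2, rfl⟩ | ⟨hE, rfl⟩)
        · exact Or.inl (Or.inl h)
        · exact Or.inl (Or.inr ⟨hfr1cond.mpr ⟨hE, hn2⟩, rfl⟩)
        · exact Or.inr ⟨hfr2cond.mpr hE, rfl⟩
    have hacc' : ∀ c, c ∈ (pvGenP n n1 (acc, marked) (a0, b0)).1 ↔
        (pvEnqB n c = true ∧ c.1 + c.2 = k + 1 ∧ (a0 + 1 ≤ c.1 ∨ (c.1 = a0 ∧ 1 ≤ c.2))) := by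
      intro c
      rw [hst2acc c]
      constructor
      · rintro (hc | ⟨hE, hno, rfl⟩ | ⟨hE, rfl⟩)
        · obtain ⟨hE, hs, hp⟩ := (hacc c).mp hc
          exact ⟨hE, hs, by omega⟩
        · exact ⟨hE, by simp; omega, by simp⟩
        · exact ⟨hE, by simp; omega, by simp⟩
      · rintro ⟨hE, hs, hp⟩
        rcases hp with hp | ⟨hp1, hp2⟩
        · by_cases hceq : c.1 = a0 + 1
          · have hcc : c = (a0 + 1, b0) := by
              obtain ⟨x, y⟩ := c; simp only at hceq hs ⊢; simp; omega
            subst hcc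
            by_cases hin : (a0 + 1, b0) ∈ acc
            · exact Or.inl hin
            · exact Or.inr (Or.inl ⟨hE, hin, rfl⟩)
          · left
            apply (hacc c).mpr
            refine ⟨hE, hs, ?_⟩
            by_contra hno
            push_neg at hno
            obtain ⟨hle, himp⟩ := hno
            rcases Nat.eq_zero_or_pos c.2 with hz | hpos
            · have henq : pvEnqB n (c.1 - 1, 0) = true := by
                rcases (pvEnqB_iff n c).mp hE with ⟨hh1, hh2⟩ | ⟨hh1, hh2⟩
                · exact (pvEnqB_iff n _).mpr (by left; simp; omega)
                · exact (pvEnqB_iff n _).mpr (by left; simp; omega)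
              have hmem := (hR (c.1 - 1, 0)).mpr ⟨henq, by simp; omega, by simp; omega⟩
              rcases List.mem_cons.mp hmem with heq | hmem'
              · simp at heq; omega
              · have := hRmax _ hmem'; simp at this; omega
            · have hlt : c.1 < t := by
                rcases Nat.lt_or_ge c.1 t with h | h
                · exact h
                · have he : c.1 = t := by omega
                  have := himp he
                  omega
              have hcE : c.1 < n ∧ c.2 < n := by
                rcases (pvEnqB_iff n c).mp hE with h | ⟨hh1, hh2⟩
                · exact h
                · omega
              have hmem := (hR (c.1, c.2 - 1)).mpr
                ⟨(pvEnqB_iff n _).mpr (by left; simp; omega), by simp; omega, by simp; omega⟩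
              rcases List.mem_cons.mp hmem with heq | hmem'
              · simp at heq; omega
              · have := hRmax _ hmem'; simp at this; omega
        · have hcc : c = (a0, b0 + 1) := by
            obtain ⟨x, y⟩ := c; simp only at hp1 hp2 hs ⊢; simp; omega
          subst hcc
          exact Or.inr (Or.inr ⟨hE, rfl⟩)
    have hm' : ∀ r, r ∈ (pvGenP n n1 (acc, marked) (a0, b0)).2 ↔
        ((∃ c, pvEnqB n c = true ∧ 1 ≤ c.1 + c.2 ∧ c.1 + c.2 ≤ k ∧ pvRes n n1 c = r) ∨
         (∃ c, c ∈ (pvGenP n n1 (acc, marked) (a0, b0)).1 ∧ pvRes n n1 c = r)) := by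
      intro r
      rw [hst2m r]
      constructor
      · rintro (hr | ⟨hE, hno, rfl⟩ | ⟨hE, rfl⟩)
        · rcases (hm r).mp hr with h | ⟨c, hc, h4⟩
          · exact Or.inl h
          · exact Or.inr ⟨c, (hst2acc c).mpr (Or.inl hc), h4⟩
        · exact Or.inr ⟨(a0 + 1, b0), (hst2acc _).mpr (Or.inr (Or.inl ⟨hE, hno, rfl⟩)), rfl⟩
        · exact Or.inr ⟨(a0, b0 + 1), (hst2acc _).mpr (Or.inr (Or.inr ⟨hE, rfl⟩)), rfl⟩
      · rintro (h | ⟨c, hc, h4⟩)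
        · exact Or.inl ((hm r).mpr (Or.inl h))
        · rcases (hst2acc c).mp hc with hin | ⟨hE, hno, rfl⟩ | ⟨hE, rfl⟩
          · exact Or.inl ((hm r).mpr (Or.inr ⟨c, hin, h4⟩))
          · exact Or.inr (Or.inl ⟨hE, hno, h4.symm⟩)
          · exact Or.inr (Or.inr ⟨hE, h4.symm⟩)
    have haccs' : (pvGenP n n1 (acc, marked) (a0, b0)).1.Pairwise (fun p r => r.1 < p.1) := by
      rw [hgenP]
      apply pvGen1_pairwise
      · apply pvGen1_pairwise _ _ _ _ haccs
        intro hf x hx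
        obtain ⟨hE1, hno⟩ := hfr1cond.mp hf
        have hx1 := haccR x hx
        rcases Nat.eq_or_lt_of_le hx1 with heq | hlt
        · exfalso
          obtain ⟨hxE, hxs, _⟩ := (hacc x).mp hx
          have hxx : x = (a0 + 1, b0) := by
            obtain ⟨u, v⟩ := x; simp only at heq hxs ⊢; simp; omega
          exact hno (hxx ▸ hx)
        · simpa using hlt
      · intro hf x hx
        rcases (pvGen1_mem_acc _ _ _ _ _).mp hx with hxa | ⟨_, rfl⟩
        · have := haccR x hxa; simp; omega
        · simp
    exact ih (pvGenP n n1 (acc, marked) (a0, b0)).1 (pvGenP n n1 (acc, marked) (a0, b0)).2 a0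
      hR' (List.pairwise_cons.mp hRs).2 hacc' haccs' hm'

theorem pvFirstPar_succ (q : List Int) (n1 : ℕ) (S1 g : Int) (s j : ℕ) :
    pvFirstPar q n1 S1 g (s + 1) j
      = if pvRowPar q n1 S1 g j then ((j : Int) + 1) else pvFirstPar q n1 S1 g s (j + 1) := rfl

theorem pvOuter (q : List Int) (n1 : ℕ) (S1 g : Int) (hn : 0 < q.length) :
    ∀ (s : ℕ) (k : ℕ) (L M : List (ℕ × ℕ)) (fuel : ℕ),
    pvInv q.length n1 k L M → 1 ≤ k → 2 * q.length ≤ k + s → s * (q.length + 2) + 1 ≤ fuel →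
    bfsA q (q.length : Int) g fuel (L.map (pvEnc q n1 S1)) (pvDictOf M) = pvFirstPar q n1 S1 g s k := by
  intro s
  induction s with
  | zero =>
    rintro k L M fuel ⟨hL, hLs, hM⟩ hk hbound hfuel
    have hLnil : L = [] := by
      cases hLc : L with
      | nil => rfl
      | cons c L' =>
        exfalso
        obtain ⟨hE, hsum⟩ := (hL c).mp (hLc ▸ List.mem_cons_self ..)
        have := pvEnq_level_bound q.length hn c hE
        omega
    subst hLnil
    obtain ⟨f', rfl⟩ : ∃ f', fuel = f' + 1 := ⟨fuel - 1, by omega⟩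
    rw [List.map_nil, bfsA]
    rfl
  | succ s ih =>
    rintro k L M fuel ⟨hL, hLs, hM⟩ hk hbound hfuel
    by_cases hLnil : L = []
    · subst hLnil
      obtain ⟨f', rfl⟩ : ∃ f', fuel = f' + 1 := ⟨fuel - 1, by omega⟩
      rw [List.map_nil, bfsA]
      rw [pvFirstPar_none q n1 S1 g hn (s + 1) k hk
        (fun c hE hsum => by simpa using (hL c).mpr ⟨hE, hsum⟩)]
    · have hsum : ∀ c ∈ L, c.1 + c.2 = k := fun c hc => ((hL c).mp hc).2
      have hlen : L.length ≤ q.length + 1 := pvSortedLen q.length L hLs (fun c hc => by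
        have hE := ((hL c).mp hc).1
        rcases (pvEnqB_iff _ c).mp hE with ⟨h1, _⟩ | ⟨h1, _⟩ <;> omega)
      have hexp : (s + 1) * (q.length + 2) = s * (q.length + 2) + (q.length + 2) := by ring
      have hLev := pvLevel q n1 S1 g hn k L hsum [] M (fuel - L.length)
      rw [List.append_nil] at hLev
      rw [show fuel = L.length + (fuel - L.length) by omega, hLev,
          pvAny_eq_rowPar q n1 S1 g k L hL]
      have hgen := pvGenGo q.length n1 hn k L [] M (k + 1)
        (fun c => by
          rw [hL c]
          constructor
          · rintro ⟨h1, h2⟩; exact ⟨h1, h2, by omega⟩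
          · rintro ⟨h1, h2, _⟩; exact ⟨h1, h2⟩)
        hLs
        (fun c => by
          simp only [List.not_mem_nil, false_iff]
          rintro ⟨h1, h2, h3 | ⟨h3, h4⟩⟩ <;> omega)
        List.Pairwise.nil
        (fun r => by
          rw [hM r]
          constructor
          · intro h; exact Or.inl h
          · rintro (h | ⟨c, hc, _⟩)
            · exact h
            · simp at hc)
      obtain ⟨hgL, hgS, hgM⟩ := hgen
      by_cases hrow : pvRowPar q n1 S1 g k = true
      · rw [if_pos hrow, pvFirstPar_succ, if_pos hrow]
      · have hrow' : pvRowPar q n1 S1 g k = false := by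
          cases h : pvRowPar q n1 S1 g k
          · rfl
          · exact absurd h hrow
        rw [hrow']
        simp only [Bool.false_eq_true, if_false]
        rw [pvFirstPar_succ, hrow']
        simp only [Bool.false_eq_true, if_false]
        exact ih (k + 1) (pvGenL q.length n1 ([], M) L).1 (pvGenL q.length n1 ([], M) L).2
          (fuel - L.length) ⟨hgL, hgS, hgM⟩ (by omega) (by omega) (by omega)

theorem pvHit00 (q : List Int) (n1 : ℕ) (S1 g : Int) (hn : 0 < q.length) :
    pvRowPar q n1 S1 g 0 = pvHitB q n1 S1 g (0, 0) := by
  cases hA : pvRowPar q n1 S1 g 0 <;> cases hB : pvHitB q n1 S1 g (0, 0) <;> try rfl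
  · exfalso
    rw [pvRowPar, List.any_eq_false] at hA
    have := hA 0 (List.mem_range.mpr (by omega))
    apply this
    simp only [Bool.and_eq_true, decide_eq_true_eq]
    exact ⟨⟨by omega, (pvEnqB_iff _ _).mpr (by left; simp; omega)⟩, hB⟩
  · exfalso
    rw [pvRowPar, List.any_eq_true] at hA
    obtain ⟨x, _, hx⟩ := hA
    simp only [Bool.and_eq_true, decide_eq_true_eq] at hx
    obtain ⟨⟨hx0, _⟩, hhit⟩ := hx
    have hxz : x = 0 := by omega
    subst hxz
    simp only [Nat.sub_zero] at hhit
    rw [hhit] at hB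
    exact absurd hB (by simp)

theorem pvSolutionA (queue1 queue2 : List Int) (hn : queue1 ++ queue2 ≠ []) :
    solution queue1 queue2 =
      (if PySem.Int.mod (queue1 ++ queue2).sum 2 ≠ 0 then -1
       else pvFirstPar (queue1 ++ queue2) queue1.length queue1.sum
              (PySem.Int.floordiv (queue1 ++ queue2).sum 2) (2 * (queue1 ++ queue2).length) 0) := by
  have hn' : 0 < (queue1 ++ queue2).length := by
    cases h : queue1 ++ queue2 with
    | nil => exact absurd h hn
    | cons x xs => simp [h]
  unfold solution
  by_cases hodd : PySem.Int.mod (queue1 ++ queue2).sum 2 ≠ 0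
  · rw [if_pos hodd, if_pos hodd]
  · rw [if_neg hodd, if_neg hodd]
    set q := queue1 ++ queue2 with hq
    set n1 : ℕ := queue1.length with hn1
    set S1 : Int := queue1.sum with hS1
    set g : Int := PySem.Int.floordiv q.sum 2 with hg
    have hct0 : ((queue1.length : Int) - 1).emod (q.length : Int)
        = (((n1 + q.length - 1 + 0) % q.length : ℕ) : Int) := by
      have hee : ∀ x y : Int, x.emod y = x % y := fun _ _ => rfl
      have h1 : ((queue1.length : Int) - 1) % (q.length : Int)
          = (((queue1.length : Int) - 1) + (q.length : Int)) % (q.length : Int) :=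
        (Int.add_emod_right _ _).symm
      have h2 : ((queue1.length : Int) - 1) + (q.length : Int) = ((n1 + q.length - 1 + 0 : ℕ) : Int) := by
        simp only [hn1]
        omega
      rw [hee, h1, h2, ← Int.natCast_mod]
    have hstep := pvStep q n1 S1 g hn' 0 0 ((queue1.length : Int) - 1) hct0 [] []
      ((2 * q.length + 2) * (q.length + 2) - 1)
    have hfz : (2 * q.length + 2) * (q.length + 2) - 1 + 1 = (2 * q.length + 2) * (q.length + 2) := by
      have hpos : 0 < (2 * q.length + 2) * (q.length + 2) := Nat.mul_pos (by omega) (by omega)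
      omega
    rw [hfz] at hstep
    rw [show ((0 % q.length : ℕ) : Int) = (0 : Int) by simp] at hstep
    rw [show pvF q n1 S1 0 0 = S1 by simp [pvF, pvP, pvQ]] at hstep
    rw [show ((0 + 0 : ℕ) : Int) = (0 : Int) by simp] at hstep
    rw [show pvDictOf [] = PySem.Dict.empty from rfl] at hstep
    rw [hstep]
    have hgen := pvGenGo q.length n1 hn' 0 [(0, 0)] [] [] 1
      (fun c => by
        constructor
        · intro hc
          rw [List.mem_singleton] at hc
          subst hc
          exact ⟨(pvEnqB_iff _ _).mpr (by left; simp; omega), by simp, by simp⟩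
        · rintro ⟨h1, h2, h3⟩
          rw [List.mem_singleton]
          obtain ⟨x, y⟩ := c
          simp at h2 h3 ⊢
          omega)
      (List.pairwise_singleton ..)
      (fun c => by
        simp only [List.not_mem_nil, false_iff]
        rintro ⟨h1, h2, h3 | ⟨h3, h4⟩⟩ <;> omega)
      List.Pairwise.nil
      (fun r => by
        simp only [List.not_mem_nil, false_iff]
        rintro (⟨c, _, h2, h3, _⟩ | ⟨c, hc, _⟩)
        · omega
        · simp at hc)
    obtain ⟨hgL, hgS, hgM⟩ := hgen
    have hfold1 : pvGenL q.length n1 ([], []) [(0, 0)] = pvGenP q.length n1 ([], []) (0, 0) := rfl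
    rw [hfold1] at hgL hgS hgM
    have houter := pvOuter q n1 S1 g hn' (2 * q.length - 1) 1
      (pvGenP q.length n1 ([], []) (0, 0)).1 (pvGenP q.length n1 ([], []) (0, 0)).2
      ((2 * q.length + 2) * (q.length + 2) - 1)
      ⟨hgL, hgS, hgM⟩ (by omega) (by omega) ?fuel
    case fuel =>
      have hmul : (2 * q.length - 1 + 3) * (q.length + 2) = (2 * q.length + 2) * (q.length + 2) := by
        congr 1
        omega
      rw [add_mul] at hmul
      have h2 : 1 * (q.length + 2) ≤ 3 * (q.length + 2) := by
        apply Nat.mul_le_mul_right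
        omega
      rw [one_mul] at h2
      omega
    rw [List.nil_append, houter]
    rw [show 2 * q.length = (2 * q.length - 1) + 1 by omega, pvFirstPar_succ]
    rw [pvHit00 q n1 S1 g hn']
    by_cases hh1 : pvF q n1 S1 (0 + 1) 0 = g
    · rw [if_pos hh1, if_pos (by simp [pvHitB, hh1])]
      simp
    · rw [if_neg hh1]
      by_cases hh2 : pvF q n1 S1 0 (0 + 1) = g
      · rw [if_pos hh2, if_pos (by simp [pvHitB, hh2])]
        simp
      · rw [if_neg hh2, if_neg (by simp [pvHitB, hh1, hh2])]
        norm_num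

-- ===== B-side: the port equals pvFirstRect =====
theorem pvGetDMap (f : ℕ → Int) (m x : ℕ) (hx : x < m) :
    PySem.List.pyGetD ((List.range m).map f) ((x : ℕ) : Int) 0 = f x := by
  rw [PySem.List.pyGetD_natCast]
  rw [List.getD_eq_getElem?_getD]
  simp [List.getElem?_range, hx]

theorem pvPops (q : List Int) (hn : 0 < q.length) (m : ℕ) (hm : m ≤ q.length) :
    (PySem.List.pyRange 0 ((m : ℕ) : Int) 1).foldl
      (fun (st : List Int × Int) i =>
        (st.1 ++ [st.2 + PySem.List.pyGetD q i 0],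
         st.2 + PySem.List.pyGetD q i 0)) ([0], 0)
    = ((List.range (m + 1)).map (pvP q), pvP q m) := by
  induction m with
  | zero =>
    rw [show ((0 : ℕ) : Int) = 0 by simp, PySem.List.pyRange_one_eq_nil (le_refl 0)]
    simp [pvP]
  | succ m ih =>
    rw [show ((m + 1 : ℕ) : Int) = ((m : ℕ) : Int) + 1 by push_cast; ring,
        PySem.List.pyRange_one_succ_right (by positivity)]
    rw [List.foldl_append, ih (by omega)]
    have hget : PySem.List.pyGetD q ((m : ℕ) : Int) 0 = q.getD m 0 := PySem.List.pyGetD_natCast q m 0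
    simp only [List.foldl_cons, List.foldl_nil, hget]
    have hmlt : m % q.length = m := Nat.mod_eq_of_lt (by omega)
    have hstep2 : pvP q m + q.getD m 0 = pvP q (m + 1) := by
      rw [show pvP q (m + 1) = pvP q m + q.getD (m % q.length) 0 from rfl, hmlt]
    rw [hstep2]
    rw [show m + 1 + 1 = (m + 1) + 1 from rfl, List.range_succ (n := m + 1), List.map_append]
    simp

theorem pvPushes (q : List Int) (n1 : ℕ) (hn : 0 < q.length) (m : ℕ) :
    (PySem.List.pyRange 0 ((m : ℕ) : Int) 1).foldl
      (fun (st : List Int × Int) i =>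
        (st.1 ++ [st.2 + PySem.List.pyGetD q (PySem.Int.mod (((n1 : ℕ) : Int) + i) (q.length : Int)) 0],
         st.2 + PySem.List.pyGetD q (PySem.Int.mod (((n1 : ℕ) : Int) + i) (q.length : Int)) 0)) ([0], 0)
    = ((List.range (m + 1)).map (pvQ q n1), pvQ q n1 m) := by
  induction m with
  | zero =>
    rw [show ((0 : ℕ) : Int) = 0 by simp, PySem.List.pyRange_one_eq_nil (le_refl 0)]
    simp [pvQ]
  | succ m ih =>
    rw [show ((m + 1 : ℕ) : Int) = ((m : ℕ) : Int) + 1 by push_cast; ring,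
        PySem.List.pyRange_one_succ_right (by positivity)]
    rw [List.foldl_append, ih]
    have hstep : PySem.Int.mod (((n1 : ℕ) : Int) + ((m : ℕ) : Int)) (q.length : Int)
        = (((n1 + m) % q.length : ℕ) : Int) := by
      rw [PySem.Int.mod_eq_emod_of_pos (by exact_mod_cast hn),
          show ((n1 : ℕ) : Int) + ((m : ℕ) : Int) = ((n1 + m : ℕ) : Int) by push_cast; ring]
      exact (Int.natCast_mod (n1 + m) q.length).symm
    simp only [List.foldl_cons, List.foldl_nil, hstep, PySem.List.pyGetD_natCast]
    have hstep2 : pvQ q n1 m + q.getD ((n1 + m) % q.length) 0 = pvQ q n1 (m + 1) := rfl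
    rw [hstep2]
    rw [show m + 1 + 1 = (m + 1) + 1 from rfl, List.range_succ (n := m + 1), List.map_append]
    simp

theorem pvBHits (q : List Int) (n1 : ℕ) (S1 g : Int) (x y : ℕ)
    (hx : x < q.length + 1) (hy : y < q.length + 1) :
    bHits ((List.range (q.length + 1)).map (pvP q)) ((List.range (q.length + 1)).map (pvQ q n1)) S1 g
      ((x : ℕ) : Int) ((y : ℕ) : Int) = decide (pvF q n1 S1 x y = g) := by
  unfold bHits
  rw [pvGetDMap (pvP q) _ x hx, pvGetDMap (pvQ q n1) _ y hy]
  simp [pvF]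

theorem pvBLoop (q : List Int) (n1 : ℕ) (S1 g : Int) (hn : 0 < q.length) :
    ∀ (m j : ℕ),
    bLoop ((List.range (q.length + 1)).map (pvP q)) ((List.range (q.length + 1)).map (pvQ q n1)) S1 g
      (q.length : Int) (PySem.List.pyRange ((j + 1 : ℕ) : Int) ((j + 1 + m : ℕ) : Int) 1)
    = pvFirstRect q n1 S1 g m j := by
  intro m
  induction m with
  | zero =>
    intro j
    rw [PySem.List.pyRange_one_eq_nil (by simp)]
    rfl
  | succ m ih =>
    intro j
    rw [PySem.List.pyRange_one_cons (by push_cast; omega)]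
    rw [show ((j + 1 : ℕ) : Int) + 1 = ((j + 1 + 1 : ℕ) : Int) by push_cast; ring,
        show ((j + 1 + (m + 1) : ℕ) : Int) = ((j + 1 + 1 + m : ℕ) : Int) by push_cast; ring]
    rw [bLoop, ih (j + 1)]
    have hfa : ∀ x : ℕ, x ≤ q.length → x ≤ j + 1 → j + 1 ≤ x + q.length →
        bHits ((List.range (q.length + 1)).map (pvP q)) ((List.range (q.length + 1)).map (pvQ q n1)) S1 g
          ((x : ℕ) : Int) (((j + 1 : ℕ) : Int) - ((x : ℕ) : Int))
        = decide (pvF q n1 S1 x (j + 1 - x) = g) := by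
      intro x hx2 hxj hjx
      have hsub : ((j + 1 : ℕ) : Int) - ((x : ℕ) : Int) = ((j + 1 - x : ℕ) : Int) := by omega
      rw [hsub, pvBHits q n1 S1 g x (j + 1 - x) (by omega) (by omega)]
    have hcondA :
        ((PySem.List.pyRange (max 0 (((j + 1 : ℕ) : Int) - (q.length : Int))) (min ((j + 1 : ℕ) : Int) (q.length : Int) + 1) 1).any
          (fun a => bHits ((List.range (q.length + 1)).map (pvP q)) ((List.range (q.length + 1)).map (pvQ q n1)) S1 g a (((j + 1 : ℕ) : Int) - a)))
        = pvRowRect q n1 S1 g j := by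
      unfold pvRowRect
      have hiff :
          (∃ a, a ∈ PySem.List.pyRange (max 0 (((j + 1 : ℕ) : Int) - (q.length : Int))) (min ((j + 1 : ℕ) : Int) (q.length : Int) + 1) 1 ∧
            bHits ((List.range (q.length + 1)).map (pvP q)) ((List.range (q.length + 1)).map (pvQ q n1)) S1 g a (((j + 1 : ℕ) : Int) - a) = true)
          ↔ (∃ x, x ∈ List.range (q.length + 2) ∧
              (decide (j + 1 ≤ x + q.length) && decide (x ≤ j + 1) && decide (x ≤ q.length) &&
               decide (pvF q n1 S1 x (j + 1 - x) = g)) = true) := by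
        constructor
        · rintro ⟨a, har, hfa'⟩
          rw [PySem.List.mem_pyRange_one] at har
          obtain ⟨hlo, hhi⟩ := har
          have ha0 : 0 ≤ a := le_trans (le_max_left 0 _) hlo
          obtain ⟨x, rfl⟩ : ∃ x : ℕ, a = ((x : ℕ) : Int) := ⟨a.toNat, (Int.toNat_of_nonneg ha0).symm⟩
          have hlo2 : ((j + 1 : ℕ) : Int) - (q.length : Int) ≤ ((x : ℕ) : Int) :=
            le_trans (le_max_right 0 _) hlo
          have hhi2 : ((x : ℕ) : Int) ≤ min ((j + 1 : ℕ) : Int) (q.length : Int) :=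
            Int.lt_add_one_iff.mp hhi
          obtain ⟨hhi3, hhi4⟩ := le_min_iff.mp hhi2
          have hb1 : j + 1 ≤ x + q.length := by omega
          have hb2 : x ≤ j + 1 := by omega
          have hb3 : x ≤ q.length := by omega
          refine ⟨x, List.mem_range.mpr (by omega), ?_⟩
          rw [hfa x hb3 hb2 hb1] at hfa'
          simp only [Bool.and_eq_true, decide_eq_true_eq] at hfa' ⊢
          exact ⟨⟨⟨hb1, hb2⟩, hb3⟩, hfa'⟩
        · rintro ⟨x, hxr, hfx⟩
          rw [List.mem_range] at hxr
          simp only [Bool.and_eq_true, decide_eq_true_eq] at hfx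
          obtain ⟨⟨⟨hb1, hb2⟩, hb3⟩, hfg⟩ := hfx
          refine ⟨((x : ℕ) : Int), ?_, ?_⟩
          · rw [PySem.List.mem_pyRange_one]
            constructor
            · apply max_le <;> omega
            · have hmin : ((x : ℕ) : Int) ≤ min ((j + 1 : ℕ) : Int) (q.length : Int) :=
                le_min (by omega) (by omega)
              omega
          · rw [hfa x hb3 hb2 hb1]
            simp only [decide_eq_true_eq]
            exact hfg
      rw [← List.any_eq_true, ← List.any_eq_true] at hiff
      exact Bool.eq_iff_iff.mpr hiff
    rw [hcondA]
    conv_rhs => rw [pvFirstRect]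
    rw [show ((j + 1 : ℕ) : Int) = ((j : ℕ) : Int) + 1 by push_cast; ring]

theorem pvSolutionB (queue1 queue2 : List Int) (hn : queue1 ++ queue2 ≠ []) :
    solution_alt queue1 queue2 =
      (if PySem.Int.mod (queue1 ++ queue2).sum 2 ≠ 0 then -1
       else pvFirstRect (queue1 ++ queue2) queue1.length queue1.sum
              (PySem.Int.floordiv (queue1 ++ queue2).sum 2) (2 * (queue1 ++ queue2).length) 0) := by
  have hn' : 0 < (queue1 ++ queue2).length := by
    cases h : queue1 ++ queue2 with
    | nil => exact absurd h hn
    | cons x xs => simp [h]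
  simp only [solution_alt]
  by_cases hodd : PySem.Int.mod (queue1 ++ queue2).sum 2 ≠ 0
  · rw [if_pos hodd, if_pos hodd]
  · rw [if_neg hodd, if_neg hodd]
    rw [pvPops (queue1 ++ queue2) hn' (queue1 ++ queue2).length (le_refl _),
        pvPushes (queue1 ++ queue2) queue1.length hn' ((queue1 ++ queue2).length)]
    have h := pvBLoop (queue1 ++ queue2) queue1.length queue1.sum
      (PySem.Int.floordiv (queue1 ++ queue2).sum 2) hn' (2 * (queue1 ++ queue2).length) 0
    rw [show ((0 + 1 : ℕ) : Int) = 1 by simp,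
        show ((0 + 1 + 2 * (queue1 ++ queue2).length : ℕ) : Int)
          = 2 * ((queue1 ++ queue2).length : Int) + 1 by push_cast; ring] at h
    exact h

-- ===== prefix-sum identities =====
theorem pvP_take (q : List Int) : ∀ a, a ≤ q.length → pvP q a = (q.take a).sum := by
  intro a
  induction a with
  | zero => intro _; simp [pvP]
  | succ a ih =>
    intro ha
    have hlt : a < q.length := by omega
    rw [show pvP q (a + 1) = pvP q a + q.getD (a % q.length) 0 from rfl,
        Nat.mod_eq_of_lt hlt, ih (by omega)]
    rw [List.sum_take_succ q a hlt, List.getD_eq_getElem?_getD, List.getElem?_eq_getElem hlt]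
    simp

theorem pvQ_take (q : List Int) : ∀ b s, s + b ≤ q.length → pvQ q s b = ((q.drop s).take b).sum := by
  intro b
  induction b with
  | zero => intro s _; simp [pvQ]
  | succ b ih =>
    intro s hs
    have hlt : s + b < q.length := by omega
    have hlt' : b < (q.drop s).length := by simp; omega
    rw [show pvQ q s (b + 1) = pvQ q s b + q.getD ((s + b) % q.length) 0 from rfl,
        Nat.mod_eq_of_lt hlt, ih s (by omega)]
    rw [List.sum_take_succ (q.drop s) b hlt', List.getD_eq_getElem?_getD,
        List.getElem?_eq_getElem hlt]
    simp [List.getElem_drop]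

theorem pvQ_add (q : List Int) (s b : ℕ) : ∀ c, pvQ q s (b + c) = pvQ q s b + pvQ q (s + b) c := by
  intro c
  induction c with
  | zero => simp [pvQ]
  | succ c ih =>
    rw [show b + (c + 1) = (b + c) + 1 from rfl,
        show pvQ q s ((b + c) + 1) = pvQ q s (b + c) + q.getD ((s + (b + c)) % q.length) 0 from rfl,
        ih,
        show pvQ q (s + b) (c + 1) = pvQ q (s + b) c + q.getD (((s + b) + c) % q.length) 0 from rfl,
        show s + (b + c) = (s + b) + c by omega]
    ring

theorem pvQ_start_n (q : List Int) : ∀ c, c ≤ q.length → pvQ q q.length c = (q.take c).sum := by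
  intro c
  induction c with
  | zero => intro _; simp [pvQ]
  | succ c ih =>
    intro hc
    have hlt : c < q.length := by omega
    have hidx : (q.length + c) % q.length = c := by
      rw [Nat.add_mod_left, Nat.mod_eq_of_lt hlt]
    rw [show pvQ q q.length (c + 1) = pvQ q q.length c + q.getD ((q.length + c) % q.length) 0 from rfl,
        hidx, ih (by omega)]
    rw [List.sum_take_succ q c hlt, List.getD_eq_getElem?_getD, List.getElem?_eq_getElem hlt]
    simp

theorem pvP_full (q : List Int) : pvP q q.length = q.sum := by
  rw [pvP_take q q.length (le_refl _), List.take_length]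

theorem pvQ_full (q : List Int) (s : ℕ) (hs : s ≤ q.length) : pvQ q s q.length = q.sum := by
  have h1 : pvQ q s q.length = pvQ q s (q.length - s) + pvQ q (s + (q.length - s)) s := by
    rw [← pvQ_add, show q.length - s + s = q.length by omega]
  rw [show s + (q.length - s) = q.length by omega] at h1
  rw [h1, pvQ_take q (q.length - s) s (by omega), pvQ_start_n q s hs]
  rw [List.take_of_length_le (by simp)]
  have h2 : (List.take s q).sum + (List.drop s q).sum = q.sum := by
    rw [← List.sum_append, List.take_append_drop]
  omega

-- concrete values of pvF on the split q = queue1 ++ queue2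
theorem pvF_np1 (q1 q2 : List Int) :
    pvF (q1 ++ q2) q1.length q1.sum ((q1 ++ q2).length + 1) 0
      = q1.sum - pvP (q1 ++ q2) ((q1 ++ q2).length + 1) := by
  simp [pvF, pvQ]

theorem pvF_nn (q1 q2 : List Int) :
    pvF (q1 ++ q2) q1.length q1.sum (q1 ++ q2).length (q1 ++ q2).length = q1.sum := by
  unfold pvF
  rw [pvP_full, pvQ_full (q1 ++ q2) q1.length (by simp)]
  ring

theorem pvF_split (q1 q2 : List Int) :
    pvF (q1 ++ q2) q1.length q1.sum q1.length ((q1 ++ q2).length - q1.length) = q2.sum := by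
  unfold pvF
  have h1 : pvP (q1 ++ q2) q1.length = q1.sum := by
    rw [pvP_take _ _ (by simp), List.take_left]
  have h2 : pvQ (q1 ++ q2) q1.length ((q1 ++ q2).length - q1.length) = q2.sum := by
    rw [pvQ_take _ _ _ (by simp), List.drop_left]
    rw [List.take_of_length_le (by simp)]
  rw [h1, h2]
  ring

theorem pvP_np1 (q : List Int) : pvP q (q.length + 1) = q.sum + q.getD 0 0 := by
  rw [show pvP q (q.length + 1) = pvP q q.length + q.getD (q.length % q.length) 0 from rfl,
      pvP_full, Nat.mod_self]

theorem pvQ_rot (q1 q2 : List Int) (b : ℕ) (hb : b ≤ (q1 ++ q2).length) :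
    pvQ (q1 ++ q2) q1.length b = ((q2 ++ q1).take b).sum := by
  by_cases hb2 : b ≤ q2.length
  · rw [pvQ_take (q1 ++ q2) b q1.length (by simp; omega), List.drop_left,
        List.take_append_of_le_length hb2]
  · have hsplit : b = q2.length + (b - q2.length) := by omega
    rw [hsplit, pvQ_add]
    have h1 : pvQ (q1 ++ q2) q1.length q2.length = q2.sum := by
      rw [pvQ_take (q1 ++ q2) q2.length q1.length (by simp), List.drop_left, List.take_length]
    have hlen : q1.length + q2.length = (q1 ++ q2).length := by simp
    have h2 : pvQ (q1 ++ q2) (q1.length + q2.length) (b - q2.length)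
        = (q1.take (b - q2.length)).sum := by
      rw [hlen, pvQ_start_n (q1 ++ q2) (b - q2.length) (by omega),
          List.take_append_of_le_length (by simp at hb ⊢; omega)]
    rw [h1, h2, List.take_append, List.sum_append,
        show q2.length + (b - q2.length) - q2.length = b - q2.length by omega,
        List.take_of_length_le (le_refl q2.length |>.trans (by omega))]

theorem pvF_closed (q1 q2 : List Int) (a b : ℕ) (ha : a ≤ (q1 ++ q2).length)
    (hb : b ≤ (q1 ++ q2).length) :
    pvF (q1 ++ q2) q1.length q1.sum a b
      = q1.sum - ((q1 ++ q2).take a).sum + ((q2 ++ q1).take b).sum := by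
  unfold pvF
  rw [pvP_take (q1 ++ q2) a ha, pvQ_rot q1 q2 b hb]

theorem pvWrap_iff (q1 q2 : List Int) (g : Int) (hg : (q1 ++ q2).sum = 2 * g) :
    pvF (q1 ++ q2) q1.length q1.sum ((q1 ++ q2).length + 1) 0 = g
      ↔ 2 * (q1.sum - (q1 ++ q2).getD 0 0) = 3 * (q1 ++ q2).sum := by
  rw [pvF_np1, pvP_np1]
  omega

-- ===== bridges between pvFirstC (= A) and pvFirstRect (= B) =====
theorem pvRowRect_of_hit (q1 q2 : List Int) (g : Int) (a b : ℕ)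
    (ha : a ≤ (q1 ++ q2).length) (hb : b ≤ (q1 ++ q2).length) (hab : 1 ≤ a + b)
    (hf : pvF (q1 ++ q2) q1.length q1.sum a b = g) :
    pvRowRect (q1 ++ q2) q1.length q1.sum g (a + b - 1) = true := by
  unfold pvRowRect
  rw [List.any_eq_true]
  refine ⟨a, List.mem_range.mpr (by omega), ?_⟩
  simp only [Bool.and_eq_true, decide_eq_true_eq]
  refine ⟨⟨⟨by omega, by omega⟩, ha⟩, ?_⟩
  rw [show a + b - 1 + 1 - a = b by omega]
  exact hf

theorem pvBridgeA (q1 q2 : List Int) (g : Int) (hn : 0 < (q1 ++ q2).length)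
    (hg : (q1 ++ q2).sum = 2 * g)
    (hw : pvF (q1 ++ q2) q1.length q1.sum ((q1 ++ q2).length + 1) 0 ≠ g) :
    ∀ s j, (q1.sum = g → j < (q1 ++ q2).length) →
      pvFirstC (q1 ++ q2) q1.length q1.sum g s j = pvFirstRect (q1 ++ q2) q1.length q1.sum g s j := by
  intro s
  induction s with
  | zero => intro j _; rfl
  | succ s ih =>
    intro j hinv
    have hrow : pvRowC (q1 ++ q2) q1.length q1.sum g j = pvRowRect (q1 ++ q2) q1.length q1.sum g j := by
      have hmain : pvRowC (q1 ++ q2) q1.length q1.sum g j = true ↔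
          pvRowRect (q1 ++ q2) q1.length q1.sum g j = true := by
        constructor
        · intro h
          rw [pvRowC, Bool.or_eq_true] at h
          rcases h with h | h
          · rw [List.any_eq_true] at h
            obtain ⟨x, hxr, hx⟩ := h
            simp only [Bool.and_eq_true, decide_eq_true_eq, Bool.not_eq_true'] at hx
            obtain ⟨⟨⟨⟨h1, h2⟩, h3⟩, _⟩, h5⟩ := hx
            rw [pvRowRect, List.any_eq_true]
            refine ⟨x, hxr, ?_⟩
            simp only [Bool.and_eq_true, decide_eq_true_eq]
            exact ⟨⟨⟨h1, h2⟩, h3⟩, h5⟩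
          · simp only [Bool.and_eq_true, decide_eq_true_eq] at h
            exact absurd h.2 hw
        · intro h
          rw [pvRowRect, List.any_eq_true] at h
          obtain ⟨x, hxr, hx⟩ := h
          simp only [Bool.and_eq_true, decide_eq_true_eq] at hx
          obtain ⟨⟨⟨h1, h2⟩, h3⟩, h5⟩ := hx
          by_cases hexc : x = (q1 ++ q2).length ∧ j + 1 - x = (q1 ++ q2).length ∧ 1 < (q1 ++ q2).length
          · exfalso
            obtain ⟨he1, he2, he3⟩ := hexc
            subst he1
            rw [he2, pvF_nn] at h5
            have hj := hinv h5
            omega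
          · rw [pvRowC, Bool.or_eq_true]
            left
            rw [List.any_eq_true]
            refine ⟨x, hxr, ?_⟩
            simp only [Bool.and_eq_true, decide_eq_true_eq, Bool.not_eq_true']
            refine ⟨⟨⟨⟨h1, h2⟩, h3⟩, ?_⟩, h5⟩
            rw [Bool.and_eq_false_iff, Bool.and_eq_false_iff]
            by_cases hc1 : x = (q1 ++ q2).length
            · by_cases hc2 : j + 1 - x = (q1 ++ q2).length
              · right
                simp only [decide_eq_false_iff_not]
                intro hc3
                exact hexc ⟨hc1, hc2, hc3⟩
              · left; right; simpa using hc2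
            · left; left; simpa using hc1
      cases hA : pvRowC (q1 ++ q2) q1.length q1.sum g j <;>
        cases hB : pvRowRect (q1 ++ q2) q1.length q1.sum g j <;> try rfl
      · exact absurd (hmain.mpr hB) (by simp [hA])
      · exact absurd (hmain.mp hA) (by simp [hB])
    rw [show pvFirstC (q1 ++ q2) q1.length q1.sum g (s + 1) j
          = if pvRowC (q1 ++ q2) q1.length q1.sum g j then ((j : Int) + 1)
            else pvFirstC (q1 ++ q2) q1.length q1.sum g s (j + 1) from rfl,
        show pvFirstRect (q1 ++ q2) q1.length q1.sum g (s + 1) j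
          = if pvRowRect (q1 ++ q2) q1.length q1.sum g j then ((j : Int) + 1)
            else pvFirstRect (q1 ++ q2) q1.length q1.sum g s (j + 1) from rfl,
        hrow]
    by_cases hr : pvRowRect (q1 ++ q2) q1.length q1.sum g j = true
    · rw [if_pos hr, if_pos hr]
    · rw [if_neg hr, if_neg hr]
      apply ih
      intro hs1
      have hj := hinv hs1
      by_cases hje : j + 1 = (q1 ++ q2).length
      · exfalso
        apply hr
        have hq : (q1 ++ q2).sum = q1.sum + q2.sum := List.sum_append ..
        have := pvRowRect_of_hit q1 q2 g q1.length ((q1 ++ q2).length - q1.length)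
          (by simp) (by omega) (by omega)
          (by rw [pvF_split]; omega)
        rwa [show q1.length + ((q1 ++ q2).length - q1.length) - 1 = j by
              have : q1.length ≤ (q1 ++ q2).length := by simp
              omega] at this
      · omega

theorem pvBridgeB (q1 q2 : List Int) (g : Int) (hn : 0 < (q1 ++ q2).length) :
    ∀ s j, (∃ j0, j ≤ j0 ∧ j0 ≤ (q1 ++ q2).length ∧ pvRowRect (q1 ++ q2) q1.length q1.sum g j0 = true) →
      pvFirstC (q1 ++ q2) q1.length q1.sum g s j = pvFirstRect (q1 ++ q2) q1.length q1.sum g s j := by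
  intro s
  induction s with
  | zero => intro j _; rfl
  | succ s ih =>
    rintro j ⟨j0, hj0, hj0n, hr0⟩
    rw [show pvFirstC (q1 ++ q2) q1.length q1.sum g (s + 1) j
          = if pvRowC (q1 ++ q2) q1.length q1.sum g j then ((j : Int) + 1)
            else pvFirstC (q1 ++ q2) q1.length q1.sum g s (j + 1) from rfl,
        show pvFirstRect (q1 ++ q2) q1.length q1.sum g (s + 1) j
          = if pvRowRect (q1 ++ q2) q1.length q1.sum g j then ((j : Int) + 1)
            else pvFirstRect (q1 ++ q2) q1.length q1.sum g s (j + 1) from rfl]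
    by_cases hr : pvRowRect (q1 ++ q2) q1.length q1.sum g j = true
    · have hj : j ≤ (q1 ++ q2).length := le_trans hj0 hj0n
      have hc : pvRowC (q1 ++ q2) q1.length q1.sum g j = true := by
        rw [pvRowRect, List.any_eq_true] at hr
        obtain ⟨x, hxr, hx⟩ := hr
        simp only [Bool.and_eq_true, decide_eq_true_eq] at hx
        obtain ⟨⟨⟨h1, h2⟩, h3⟩, h5⟩ := hx
        rw [pvRowC, Bool.or_eq_true]
        left
        rw [List.any_eq_true]
        refine ⟨x, hxr, ?_⟩
        simp only [Bool.and_eq_true, decide_eq_true_eq, Bool.not_eq_true']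
        refine ⟨⟨⟨⟨h1, h2⟩, h3⟩, ?_⟩, h5⟩
        rw [Bool.and_eq_false_iff, Bool.and_eq_false_iff]
        by_cases hc1 : x = (q1 ++ q2).length
        · by_cases hc2 : j + 1 - x = (q1 ++ q2).length
          · right
            simp only [decide_eq_false_iff_not, not_lt]
            omega
          · left; right; simpa using hc2
        · left; left; simpa using hc1
      rw [if_pos hc, if_pos hr]
    · have hj0j : j ≠ j0 := by
        intro he
        exact hr (he ▸ hr0)
      have hjlt : j < (q1 ++ q2).length := by omega
      have hc : pvRowC (q1 ++ q2) q1.length q1.sum g j = false := by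
        cases hcc : pvRowC (q1 ++ q2) q1.length q1.sum g j
        · rfl
        · exfalso
          rw [pvRowC, Bool.or_eq_true] at hcc
          rcases hcc with h | h
          · rw [List.any_eq_true] at h
            obtain ⟨x, hxr, hx⟩ := h
            simp only [Bool.and_eq_true, decide_eq_true_eq, Bool.not_eq_true'] at hx
            obtain ⟨⟨⟨⟨h1, h2⟩, h3⟩, _⟩, h5⟩ := hx
            apply hr
            rw [pvRowRect, List.any_eq_true]
            refine ⟨x, hxr, ?_⟩
            simp only [Bool.and_eq_true, decide_eq_true_eq]
            exact ⟨⟨⟨h1, h2⟩, h3⟩, h5⟩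
          · simp only [Bool.and_eq_true, decide_eq_true_eq] at h
            omega
      rw [hc, if_neg hr]
      simp only [Bool.false_eq_true, if_false]
      exact ih (j + 1) ⟨j0, by omega, hj0n, hr0⟩

-- ===== under D_: A returns n+1, B does not =====
theorem pvFirstC_skip (q : List Int) (n1 : ℕ) (S1 g : Int) :
    ∀ m s j, (∀ i, i < m → pvRowC q n1 S1 g (j + i) = false) →
      pvFirstC q n1 S1 g (m + s) j = pvFirstC q n1 S1 g s (j + m) := by
  intro m
  induction m with
  | zero => intro s j _; simp
  | succ m ih =>
    intro s j hrows
    rw [show m + 1 + s = (m + s) + 1 by omega,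
        show pvFirstC q n1 S1 g ((m + s) + 1) j
          = if pvRowC q n1 S1 g j then ((j : Int) + 1) else pvFirstC q n1 S1 g (m + s) (j + 1) from rfl,
        show pvRowC q n1 S1 g j = false by simpa using hrows 0 (by omega)]
    simp only [Bool.false_eq_true, if_false]
    rw [ih s (j + 1) (fun i hi => by
      rw [show j + 1 + i = j + (i + 1) by omega]
      exact hrows (i + 1) (by omega))]
    congr 1
    omega

theorem pvFirstRect_skip (q : List Int) (n1 : ℕ) (S1 g : Int) :
    ∀ m s j, (∀ i, i < m → pvRowRect q n1 S1 g (j + i) = false) →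
      pvFirstRect q n1 S1 g (m + s) j = pvFirstRect q n1 S1 g s (j + m) := by
  intro m
  induction m with
  | zero => intro s j _; simp
  | succ m ih =>
    intro s j hrows
    rw [show m + 1 + s = (m + s) + 1 by omega,
        show pvFirstRect q n1 S1 g ((m + s) + 1) j
          = if pvRowRect q n1 S1 g j then ((j : Int) + 1) else pvFirstRect q n1 S1 g (m + s) (j + 1) from rfl,
        show pvRowRect q n1 S1 g j = false by simpa using hrows 0 (by omega)]
    simp only [Bool.false_eq_true, if_false]
    rw [ih s (j + 1) (fun i hi => by
      rw [show j + 1 + i = j + (i + 1) by omega]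
      exact hrows (i + 1) (by omega))]
    congr 1
    omega

theorem pvFirstRect_lb (q : List Int) (n1 : ℕ) (S1 g : Int) :
    ∀ s j, pvFirstRect q n1 S1 g s j = -1 ∨ ((j : Int) + 1) ≤ pvFirstRect q n1 S1 g s j := by
  intro s
  induction s with
  | zero => intro j; left; rfl
  | succ s ih =>
    intro j
    rw [show pvFirstRect q n1 S1 g (s + 1) j
          = if pvRowRect q n1 S1 g j then ((j : Int) + 1) else pvFirstRect q n1 S1 g s (j + 1) from rfl]
    by_cases hr : pvRowRect q n1 S1 g j = true
    · rw [if_pos hr]; right; omega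
    · rw [if_neg hr]
      rcases ih (j + 1) with h | h
      · left; exact h
      · right
        push_cast at h ⊢
        omega

-- the no-hit clause of D_, in pvF form
theorem pvNoHit_of_D (q1 q2 : List Int) (g : Int) (hg : (q1 ++ q2).sum = 2 * g)
    (hnh : ∀ a ∈ List.range ((q1 ++ q2).length + 1), ∀ b ∈ List.range ((q1 ++ q2).length + 1),
      1 ≤ a + b → a + b ≤ (q1 ++ q2).length + 1 →
      2 * (q1.sum - ((q1 ++ q2).take a).sum + ((q2 ++ q1).take b).sum) ≠ (q1 ++ q2).sum) :
    ∀ a b, a ≤ (q1 ++ q2).length → b ≤ (q1 ++ q2).length → 1 ≤ a + b → a + b ≤ (q1 ++ q2).length + 1 →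
      pvF (q1 ++ q2) q1.length q1.sum a b ≠ g := by
  intro a b ha hb h1 h2 hf
  apply hnh a (List.mem_range.mpr (by omega)) b (List.mem_range.mpr (by omega)) h1 h2
  rw [← pvF_closed q1 q2 a b ha hb, hf, hg]

theorem pvRowRect_false_of_nohit (q1 q2 : List Int) (g : Int) (j : ℕ)
    (hj : j ≤ (q1 ++ q2).length)
    (hnh : ∀ a b, a ≤ (q1 ++ q2).length → b ≤ (q1 ++ q2).length → 1 ≤ a + b →
      a + b ≤ (q1 ++ q2).length + 1 → pvF (q1 ++ q2) q1.length q1.sum a b ≠ g) :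
    pvRowRect (q1 ++ q2) q1.length q1.sum g j = false := by
  unfold pvRowRect
  rw [List.any_eq_false]
  intro x hx
  simp only [Bool.and_eq_true, decide_eq_true_eq, not_and]
  rintro ⟨⟨h1, h2⟩, h3⟩
  exact hnh x (j + 1 - x) h3 (by omega) (by omega) (by omega)

theorem pvA_wrap (q1 q2 : List Int) (g : Int) (hn : 0 < (q1 ++ q2).length)
    (hw : pvF (q1 ++ q2) q1.length q1.sum ((q1 ++ q2).length + 1) 0 = g)
    (hnh : ∀ a b, a ≤ (q1 ++ q2).length → b ≤ (q1 ++ q2).length → 1 ≤ a + b →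
      a + b ≤ (q1 ++ q2).length + 1 → pvF (q1 ++ q2) q1.length q1.sum a b ≠ g) :
    pvFirstC (q1 ++ q2) q1.length q1.sum g (2 * (q1 ++ q2).length) 0
      = (((q1 ++ q2).length : Int) + 1) := by
  have hrowsC : ∀ i, i < (q1 ++ q2).length →
      pvRowC (q1 ++ q2) q1.length q1.sum g (0 + i) = false := by
    intro i hi
    rw [Nat.zero_add]
    unfold pvRowC
    rw [Bool.or_eq_false_iff]
    constructor
    · rw [List.any_eq_false]
      intro x hx
      simp only [Bool.and_eq_true, decide_eq_true_eq, not_and]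
      rintro ⟨⟨⟨h1, h2⟩, h3⟩, _⟩
      exact hnh x (i + 1 - x) h3 (by omega) (by omega) (by omega)
    · rw [Bool.and_eq_false_iff]
      left
      simp only [decide_eq_false_iff_not]
      omega
  have hsplit : 2 * (q1 ++ q2).length = (q1 ++ q2).length + (q1 ++ q2).length := by omega
  rw [hsplit, pvFirstC_skip _ _ _ _ _ _ _ hrowsC, Nat.zero_add]
  obtain ⟨s', hs'⟩ : ∃ s', (q1 ++ q2).length = s' + 1 := ⟨(q1 ++ q2).length - 1, by omega⟩
  rw [hs']
  rw [show pvFirstC (q1 ++ q2) q1.length q1.sum g (s' + 1) (s' + 1)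
        = if pvRowC (q1 ++ q2) q1.length q1.sum g (s' + 1)
          then (((s' + 1 : ℕ) : Int) + 1)
          else pvFirstC (q1 ++ q2) q1.length q1.sum g s' (s' + 1 + 1) from rfl]
  rw [if_pos ?hwrap]
  case hwrap =>
    unfold pvRowC
    rw [Bool.or_eq_true]
    right
    simp only [Bool.and_eq_true, decide_eq_true_eq]
    exact ⟨by omega, hw⟩

theorem pvB_noWrap (q1 q2 : List Int) (g : Int) (hn : 0 < (q1 ++ q2).length)
    (hnh : ∀ a b, a ≤ (q1 ++ q2).length → b ≤ (q1 ++ q2).length → 1 ≤ a + b →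
      a + b ≤ (q1 ++ q2).length + 1 → pvF (q1 ++ q2) q1.length q1.sum a b ≠ g) :
    pvFirstRect (q1 ++ q2) q1.length q1.sum g (2 * (q1 ++ q2).length) 0
      ≠ (((q1 ++ q2).length : Int) + 1) := by
  have hrows : ∀ i, i < (q1 ++ q2).length + 1 →
      pvRowRect (q1 ++ q2) q1.length q1.sum g (0 + i) = false := by
    intro i hi
    rw [Nat.zero_add]
    exact pvRowRect_false_of_nohit q1 q2 g i (by omega) hnh
  have hsplit : 2 * (q1 ++ q2).length = ((q1 ++ q2).length + 1) + ((q1 ++ q2).length - 1) := by omega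
  rw [hsplit, pvFirstRect_skip _ _ _ _ _ _ _ hrows, Nat.zero_add]
  rcases pvFirstRect_lb (q1 ++ q2) q1.length q1.sum g ((q1 ++ q2).length - 1)
      ((q1 ++ q2).length + 1) with h | h
  · rw [h]
    intro hc
    have : (0 : Int) ≤ ((q1 ++ q2).length : Int) := by positivity
    omega
  · intro hc
    rw [hc] at h
    push_cast at h
    omega

-- t = 2*g for even t
theorem pvEven (t : Int) (h : PySem.Int.mod t 2 = 0) : t = 2 * PySem.Int.floordiv t 2 := by
  have hd := PySem.Int.floordiv_mul_add_mod t 2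
  rw [h, add_zero] at hd
  omega

-- ===== VERDICT (by name: the statements are the Claim_ definitions above) =====
theorem solution_spec : Claim_unchanged_solution := by
  intro queue1 queue2 _hdom hpre
  unfold Spec_solution
  intro hnd
  have hn : 0 < (queue1 ++ queue2).length := by
    cases h : queue1 ++ queue2 with
    | nil => exact absurd h hpre
    | cons x xs => simp [h]
  rw [pvSolutionA queue1 queue2 hpre, pvSolutionB queue1 queue2 hpre]
  by_cases hodd : PySem.Int.mod (queue1 ++ queue2).sum 2 = 0
  · rw [if_neg (not_not_intro hodd), if_neg (not_not_intro hodd)]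
    set g : Int := PySem.Int.floordiv (queue1 ++ queue2).sum 2 with hgdef
    have hg : (queue1 ++ queue2).sum = 2 * g := pvEven _ hodd
    rw [pvFirst_bridge _ _ _ _ hn]
    unfold D_solution at hnd
    push_neg at hnd
    have hnd' := hnd hodd
    by_cases hw : 2 * (queue1.sum - (queue1 ++ queue2).getD 0 0) = 3 * (queue1 ++ queue2).sum
    · -- the wrap probe hits: D_'s no-hit clause must fail, giving a reachable hit ≤ n+1
      have hex := hnd' hw
      obtain ⟨a, har, b, hbr, h1, h2, hfeq⟩ := hex
      rw [List.mem_range] at har hbr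
      have hfg : pvF (queue1 ++ queue2) queue1.length queue1.sum a b = g := by
        have h2f : 2 * pvF (queue1 ++ queue2) queue1.length queue1.sum a b = 2 * g := by
          rw [pvF_closed queue1 queue2 a b (by omega) (by omega), hfeq, hg]
        omega
      apply pvBridgeB queue1 queue2 g hn
      refine ⟨a + b - 1, by omega, by omega, ?_⟩
      exact pvRowRect_of_hit queue1 queue2 g a b (by omega) (by omega) h1 hfg
    · -- the wrap probe misses: rows agree up to the (n,n) corner, handled by the invariant
      apply pvBridgeA queue1 queue2 g hn hg
      · intro hc
        exact hw ((pvWrap_iff queue1 queue2 g hg).mp hc)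
      · intro _
        exact hn
  · rw [if_pos hodd, if_pos hodd]

theorem solution_changed : Claim_changed_solution := by
  unfold Claim_changed_solution
  refine ⟨by decide, by decide, by decide, by decide, by decide, by decide⟩

theorem solution_tight : Claim_exact_solution := by
  intro queue1 queue2 _hdom hpre hD
  obtain ⟨heven, hw, hnh⟩ := hD
  have hn : 0 < (queue1 ++ queue2).length := by
    cases h : queue1 ++ queue2 with
    | nil => exact absurd h hpre
    | cons x xs => simp [h]
  rw [pvSolutionA queue1 queue2 hpre, pvSolutionB queue1 queue2 hpre]
  rw [if_neg (not_not_intro heven), if_neg (not_not_intro heven)]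
  set g : Int := PySem.Int.floordiv (queue1 ++ queue2).sum 2 with hgdef
  have hg : (queue1 ++ queue2).sum = 2 * g := pvEven _ heven
  have hwf : pvF (queue1 ++ queue2) queue1.length queue1.sum ((queue1 ++ queue2).length + 1) 0 = g :=
    (pvWrap_iff queue1 queue2 g hg).mpr hw
  have hnh' := pvNoHit_of_D queue1 queue2 g hg hnh
  rw [pvFirst_bridge _ _ _ _ hn]
  rw [pvA_wrap queue1 queue2 g hn hwf hnh']
  exact (pvB_noWrap queue1 queue2 g hn hnh').symm
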